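-- pv_equiv track=rewrite | github.com/Do1kk/slonie_bajtockie_zoo | slonie.py | metoda_1
-- ===== SOURCE A (Python) =====
-- def metoda_1(kolej_pocz, kolej_kon, wag):
--     # Dane początkowe.
--     suma1 = 0
--     kolej = kolej_pocz[:]
--     Inf = 7000
--     waga = wag[:]
--
--     # Pętla przestawiania słoni i obliczania sumy.
--     while kolej != kolej_kon:
--         # Chwilowo najmniejszy słoń i jego dane.
--         tmp_slon = min(waga)
--         nr_slonia = waga.index(tmp_slon) + 1
--         tmp_index = kolej.index(nr_slonia)
--
--         # Słoń który powinien być w miejscu chwilowo najmniejszego słonia.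
--         nr_slonia_next = kolej_kon[tmp_index]
--         tmp_index_next = kolej.index(kolej_kon[tmp_index])
--
--         # Zamiana słoni tylko jeśli nie są one na swoich miejscach.
--         if kolej.index(nr_slonia) != kolej_kon.index(nr_slonia):
--             kolej[tmp_index] = nr_slonia_next
--             kolej[tmp_index_next] = nr_slonia
--
--             # Obliczanie sumy metody 1.
--             suma1 += tmp_slon + waga[nr_slonia_next - 1]
--
--         # Ustawienie wartości większej od zakresu, by działała funkcja min().
--         waga[nr_slonia_next - 1] = Inf
--
--     return suma1
-- ===== SOURCE B (Python) =====
-- def metoda_1(kolej_pocz, kolej_kon, wag):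
--     # Decompose the position permutation into cycles;
--     # each nontrivial cycle of length L costs sum(weights) + (L-2)*min(weights).
--     pos = {v: i for i, v in enumerate(kolej_pocz)}
--     n = len(kolej_pocz)
--     seen = [False] * n
--     total = 0
--     for i in range(n):
--         if seen[i] or kolej_pocz[i] == kolej_kon[i]:
--             continue
--         csum = 0
--         cmin = None
--         clen = 0
--         j = i
--         while not seen[j]:
--             seen[j] = True
--             w = wag[kolej_pocz[j] - 1]
--             csum += w
--             clen += 1
--             if cmin is None or w < cmin:
--                 cmin = w
--             j = pos[kolej_kon[j]]
--         total += csum + (clen - 2) * cmin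
--     return total
-- ===== Notes on version B (the rewrite author's own statement) =====
-- stated objective: alternative
-- what changed: Replaces the sentinel-driven while loop of repeated min()/index() scans over mutating lists by a single cycle decomposition of the position permutation (position map built once), adding sum+(len-2)*min per nontrivial cycle.
-- outside the precondition, e.g. on metoda_1([2, 3, -1], [-1, 2, 3], [17, 6, 3]): A returns 7012, B returns 18; on metoda_1([1, 2], [2, 1], [4390, 8767]): A returns 13157, B returns 13157
import Mathlib
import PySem

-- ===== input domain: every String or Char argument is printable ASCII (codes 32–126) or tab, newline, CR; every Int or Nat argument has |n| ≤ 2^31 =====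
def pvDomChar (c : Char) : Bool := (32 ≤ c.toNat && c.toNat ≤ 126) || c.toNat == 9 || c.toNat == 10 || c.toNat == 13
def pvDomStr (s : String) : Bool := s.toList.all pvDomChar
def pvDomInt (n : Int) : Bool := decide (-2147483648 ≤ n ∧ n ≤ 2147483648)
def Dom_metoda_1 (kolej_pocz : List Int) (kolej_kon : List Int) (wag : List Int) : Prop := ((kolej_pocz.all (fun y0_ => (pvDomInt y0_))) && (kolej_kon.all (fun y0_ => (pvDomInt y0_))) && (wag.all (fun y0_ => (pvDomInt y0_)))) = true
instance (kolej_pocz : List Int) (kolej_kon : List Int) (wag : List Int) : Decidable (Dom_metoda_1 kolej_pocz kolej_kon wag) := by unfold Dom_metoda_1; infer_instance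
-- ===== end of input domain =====

-- One honest line: B replaces A's sentinel-driven min/index rescans by a single
-- cycle-decomposition pass over the position permutation (position map built once).

-- ===== PORT A =====
-- while-loop of A as fuelled recursion; fuel wag.length + 1 suffices on Pre_
-- (each iteration sets a fresh waga entry to 7000). Branches returning `suma`
-- on a `none` are Python raise points (ValueError/IndexError), excluded by Pre_.
def metoda1Loop (kolej_kon : List Int) : Nat → List Int → List Int → Int → Int
  | 0, _, _, suma => suma
  | fuel+1, kolej, waga, suma =>
    if kolej = kolej_kon then suma else
    match PySem.List.min? waga (fun x => x) with
    | none => suma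
    | some tmp_slon =>
      match PySem.List.index? waga tmp_slon with
      | none => suma
      | some idx =>
        let nr_slonia : Int := (idx : Int) + 1
        match PySem.List.index? kolej nr_slonia with
        | none => suma
        | some tmp_index =>
          match PySem.List.pyGet? kolej_kon (tmp_index : Int) with
          | none => suma
          | some nr_slonia_next =>
            match PySem.List.index? kolej nr_slonia_next with
            | none => suma
            | some tmp_index_next =>
              match PySem.List.index? kolej_kon nr_slonia with
              | none => suma
              | some kon_idx =>
                if tmp_index ≠ kon_idx then
                  match PySem.List.pyGet? waga (nr_slonia_next - 1) with
                  | none => suma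
                  | some w =>
                    metoda1Loop kolej_kon fuel
                      ((kolej.set tmp_index nr_slonia_next).set tmp_index_next nr_slonia)
                      (PySem.List.pySetD waga (nr_slonia_next - 1) 7000)
                      (suma + (tmp_slon + w))
                else
                  metoda1Loop kolej_kon fuel kolej
                    (PySem.List.pySetD waga (nr_slonia_next - 1) 7000) suma

def metoda_1 (kolej_pocz : List Int) (kolej_kon : List Int) (wag : List Int) : Int :=
  metoda1Loop kolej_kon (wag.length + 1) kolej_pocz wag 0

-- ===== PORT B =====
-- Source B: position dict built once, then one pass over positions walking each
-- unseen nontrivial cycle, adding csum + (clen-2)*cmin.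
def metoda1Walk (kolej_pocz kolej_kon wag : List Int) (pos : PySem.Dict Int Int) :
    Nat → List Bool → Int → Int → Option Int → Int → (List Bool × Int × Option Int × Int)
  | 0, seen, _, csum, cmin, clen => (seen, csum, cmin, clen)
  | fuel+1, seen, j, csum, cmin, clen =>
    match PySem.List.pyGet? seen j with
    | none => (seen, csum, cmin, clen)
    | some sj =>
      if sj then (seen, csum, cmin, clen)
      else
        let seen' := PySem.List.pySetD seen j true
        match PySem.List.pyGet? kolej_pocz j with
        | none => (seen', csum, cmin, clen)
        | some ej =>
          match PySem.List.pyGet? wag (ej - 1) with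
          | none => (seen', csum, cmin, clen)
          | some w =>
            let csum' := csum + w
            let clen' := clen + 1
            let cmin' : Option Int :=
              match cmin with
              | none => some w
              | some m => if w < m then some w else some m
            match PySem.List.pyGet? kolej_kon j with
            | none => (seen', csum', cmin', clen')
            | some tj =>
              match pos.get? tj with
              | none => (seen', csum', cmin', clen')
              | some j' =>
                metoda1Walk kolej_pocz kolej_kon wag pos fuel seen' j' csum' cmin' clen'

def metoda_1_alt (kolej_pocz : List Int) (kolej_kon : List Int) (wag : List Int) : Int :=
  let pos : PySem.Dict Int Int :=
    (PySem.List.enumerate kolej_pocz 0).foldl (fun d iv => d.insert iv.2 iv.1) PySem.Dict.empty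
  let n := kolej_pocz.length
  (List.range n).foldl
    (fun st i =>
      let seen := st.1
      let total := st.2
      if seen.getD i false || (kolej_pocz.getD i 0 == kolej_kon.getD i 0) then st
      else
        let r := metoda1Walk kolej_pocz kolej_kon wag pos (kolej_pocz.length + 1)
                   seen (i : Int) 0 none 0
        match r.2.2.1 with
        | none => (r.1, total)   -- unreachable: walk runs at least once
        | some cmin => (r.1, total + (r.2.1 + (r.2.2.2 - 2) * cmin)))
    (List.replicate n false, 0)
  |>.2

-- ===== PRECONDITION & SPEC =====
-- Pre_ admits equal orderings (A returns 0 at once), and otherwise requires both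
-- orderings to be permutations of 1..len(wag) with every weight < 7000.  Excluded
-- inputs on which A still returns: non-permutation inputs where A's value is an
-- accident of Python negative-index wraparound with the 7000 sentinel, and
-- weights ≥ 7000, which break the sentinel (A then usually loops forever; where
-- it does return it agrees with B).
def Pre_metoda_1 (kolej_pocz : List Int) (kolej_kon : List Int) (wag : List Int) : Prop :=
  kolej_pocz = kolej_kon ∨
    (kolej_pocz.Perm ((List.range wag.length).map (fun (k : Nat) => (k : Int) + 1)) ∧
     kolej_kon.Perm ((List.range wag.length).map (fun (k : Nat) => (k : Int) + 1)) ∧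
     ∀ w ∈ wag, w < 7000)
instance (kolej_pocz : List Int) (kolej_kon : List Int) (wag : List Int) : Decidable (Pre_metoda_1 kolej_pocz kolej_kon wag) := by unfold Pre_metoda_1; infer_instance

def pvWitness_metoda_1 : List Int × List Int × List Int := ([2, 1, 3], [1, 3, 2], [5, 1, 7])

def Spec_metoda_1 (kolej_pocz : List Int) (kolej_kon : List Int) (wag : List Int) (out : Int) : Prop := out = metoda_1_alt kolej_pocz kolej_kon wag
instance (kolej_pocz : List Int) (kolej_kon : List Int) (wag : List Int) (out : Int) : Decidable (Spec_metoda_1 kolej_pocz kolej_kon wag out) := by unfold Spec_metoda_1; infer_instance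

-- ===== CLAIM (what is proved, stated in full; the proofs are below) =====
def Claim_equal_metoda_1 : Prop := ∀ (kolej_pocz : List Int) (kolej_kon : List Int) (wag : List Int), Dom_metoda_1 kolej_pocz kolej_kon wag → Pre_metoda_1 kolej_pocz kolej_kon wag → Spec_metoda_1 kolej_pocz kolej_kon wag (metoda_1 kolej_pocz kolej_kon wag)

-- ===== LEMMAS AND PROOFS =====

-- ---------- Part I: orbits of a map g on positions 0..n-1 ----------

lemma pvIter_lt (n : ℕ) (g : ℕ → ℕ) (hg : ∀ j, j < n → g j < n)
    (j : ℕ) (hj : j < n) (k : ℕ) : g^[k] j < n := by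
  induction k with
  | zero => simpa
  | succ k ih => rw [Function.iterate_succ_apply']; exact hg _ ih

lemma pvIter_cancel (n : ℕ) (g : ℕ → ℕ) (hg : ∀ j, j < n → g j < n)
    (hinj : ∀ a b, a < n → b < n → g a = g b → a = b)
    (j : ℕ) (hj : j < n) :
    ∀ a c, g^[a] j = g^[a + c] j → j = g^[c] j := by
  intro a
  induction a with
  | zero => intro c h; simpa using h
  | succ a ih =>
    intro c h
    apply ih
    have h1 : g (g^[a] j) = g (g^[a + c] j) := by
      have : a + 1 + c = (a + c) + 1 := by omega
      rw [this] at h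
      rw [Function.iterate_succ_apply', Function.iterate_succ_apply'] at h
      exact h
    exact hinj _ _ (pvIter_lt n g hg j hj a) (pvIter_lt n g hg j hj (a+c)) h1

lemma pvPeriodic (n : ℕ) (g : ℕ → ℕ) (hg : ∀ j, j < n → g j < n)
    (hinj : ∀ a b, a < n → b < n → g a = g b → a = b)
    (j : ℕ) (hj : j < n) : j ∈ Function.periodicPts g := by
  have hmap : ∀ k ∈ Finset.range (n+1), g^[k] j ∈ Finset.range n := by
    intro k _; simpa using pvIter_lt n g hg j hj k
  obtain ⟨a, _, b, _, hne, heq⟩ :=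
    Finset.exists_ne_map_eq_of_card_lt_of_maps_to (by simp) hmap
  rcases Nat.lt_or_ge a b with hab | hab
  · have h := pvIter_cancel n g hg hinj j hj a (b - a)
      (by rw [Nat.add_sub_cancel' (Nat.le_of_lt hab)]; exact heq)
    exact Function.mk_mem_periodicPts (by omega) h.symm
  · have hba : b < a := by omega
    have h := pvIter_cancel n g hg hinj j hj b (a - b)
      (by rw [Nat.add_sub_cancel' (Nat.le_of_lt hba)]; exact heq.symm)
    exact Function.mk_mem_periodicPts (by omega) h.symm

noncomputable def pvOrbit (g : ℕ → ℕ) (j : ℕ) : Finset ℕ :=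
  insert j ((List.range (Function.minimalPeriod g j)).map (fun k => g^[k] j)).toFinset

lemma mem_pvOrbit (g : ℕ → ℕ) (j x : ℕ) :
    x ∈ pvOrbit g j ↔ x = j ∨ ∃ k, k < Function.minimalPeriod g j ∧ g^[k] j = x := by
  simp [pvOrbit, eq_comm]

lemma pvOrbit_self (g : ℕ → ℕ) (j : ℕ) : j ∈ pvOrbit g j := by
  simp [pvOrbit]

lemma pvIter_mem_pvOrbit (n : ℕ) (g : ℕ → ℕ) (hg : ∀ j, j < n → g j < n)
    (hinj : ∀ a b, a < n → b < n → g a = g b → a = b)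
    (j : ℕ) (hj : j < n) (k : ℕ) : g^[k] j ∈ pvOrbit g j := by
  have hper : 0 < Function.minimalPeriod g j :=
    Function.minimalPeriod_pos_of_mem_periodicPts (pvPeriodic n g hg hinj j hj)
  rw [mem_pvOrbit]
  exact Or.inr ⟨k % Function.minimalPeriod g j, Nat.mod_lt _ hper,
    Function.iterate_mod_minimalPeriod_eq⟩

lemma pvOrbit_subset (n : ℕ) (g : ℕ → ℕ) (hg : ∀ j, j < n → g j < n)
    (j : ℕ) (hj : j < n) : ∀ x ∈ pvOrbit g j, x < n := by
  intro x hx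
  rcases (mem_pvOrbit g j x).1 hx with h | ⟨k, _, hk⟩
  · omega
  · rw [← hk]; exact pvIter_lt n g hg j hj k

lemma pvOrbit_gclosed (n : ℕ) (g : ℕ → ℕ) (hg : ∀ j, j < n → g j < n)
    (hinj : ∀ a b, a < n → b < n → g a = g b → a = b)
    (j : ℕ) (hj : j < n) : ∀ x ∈ pvOrbit g j, g x ∈ pvOrbit g j := by
  intro x hx
  rcases (mem_pvOrbit g j x).1 hx with h | ⟨k, _, hk⟩
  · subst h
    simpa using pvIter_mem_pvOrbit n g hg hinj x hj 1
  · have : g x = g^[k+1] j := by rw [← hk, Function.iterate_succ_apply']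
    rw [this]
    exact pvIter_mem_pvOrbit n g hg hinj j hj (k+1)

lemma pvOrbit_eq_of_mem (n : ℕ) (g : ℕ → ℕ) (hg : ∀ j, j < n → g j < n)
    (hinj : ∀ a b, a < n → b < n → g a = g b → a = b)
    (j : ℕ) (hj : j < n) (x : ℕ) (hx : x ∈ pvOrbit g j) :
    pvOrbit g x = pvOrbit g j := by
  rcases (mem_pvOrbit g j x).1 hx with h | ⟨k, hklt, hk⟩
  · rw [h]
  have hxn : x < n := pvOrbit_subset n g hg j hj x hx
  have hper : Function.IsPeriodicPt g (Function.minimalPeriod g j) j :=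
    Function.isPeriodicPt_minimalPeriod g j
  have hback : g^[Function.minimalPeriod g j - k] x = j := by
    rw [← hk, ← Function.iterate_add_apply]
    have : Function.minimalPeriod g j - k + k = Function.minimalPeriod g j := by omega
    rw [this]; exact hper
  apply Finset.Subset.antisymm
  · intro y hy
    rcases (mem_pvOrbit g x y).1 hy with h | ⟨k', _, hk'⟩
    · subst h; exact hx
    · rw [← hk', ← hk, ← Function.iterate_add_apply]
      exact pvIter_mem_pvOrbit n g hg hinj j hj _
  · intro y hy
    rcases (mem_pvOrbit g j y).1 hy with h | ⟨k', _, hk'⟩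
    · subst h; rw [← hback]; exact pvIter_mem_pvOrbit n g hg hinj x hxn _
    · rw [← hk', ← hback, ← Function.iterate_add_apply]
      exact pvIter_mem_pvOrbit n g hg hinj x hxn _

lemma pvOrbit_fixed (g : ℕ → ℕ) (j : ℕ) (h : g j = j) : pvOrbit g j = {j} := by
  have h1 : Function.minimalPeriod g j = 1 :=
    Function.minimalPeriod_eq_one_iff_isFixedPt.2 h
  apply Finset.Subset.antisymm
  · intro x hx
    rcases (mem_pvOrbit g j x).1 hx with hh | ⟨k, hk, hkk⟩
    · simp [hh]
    · rw [h1] at hk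
      interval_cases k
      simp_all
  · intro x hx
    simp only [Finset.mem_singleton] at hx
    simp [hx, pvOrbit_self]

def pvPath (g : ℕ → ℕ) (j : ℕ) (r : ℕ) : List ℕ := (List.range r).map (fun k => g^[k] j)

lemma pvPath_nodup (g : ℕ → ℕ) (j : ℕ) (r : ℕ) (hr : r ≤ Function.minimalPeriod g j) :
    (pvPath g j r).Nodup := by
  apply (List.nodup_range).map_on
  intro a ha b hb hab
  exact Function.iterate_injOn_Iio_minimalPeriod
    (by simp at ha ⊢; omega) (by simp at hb ⊢; omega) hab

lemma pvOrbit_eq_path (n : ℕ) (g : ℕ → ℕ) (hg : ∀ j, j < n → g j < n)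
    (hinj : ∀ a b, a < n → b < n → g a = g b → a = b)
    (j : ℕ) (hj : j < n) :
    pvOrbit g j = (pvPath g j (Function.minimalPeriod g j)).toFinset := by
  have hper : 0 < Function.minimalPeriod g j :=
    Function.minimalPeriod_pos_of_mem_periodicPts (pvPeriodic n g hg hinj j hj)
  ext x
  simp only [mem_pvOrbit, pvPath, List.mem_toFinset, List.mem_map, List.mem_range]
  constructor
  · rintro (h | ⟨k, hk, hkk⟩)
    · exact ⟨0, hper, by simp [h.symm]⟩
    · exact ⟨k, hk, hkk⟩
  · rintro ⟨k, hk, hkk⟩; exact Or.inr ⟨k, hk, hkk⟩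

lemma pvOrbit_card (n : ℕ) (g : ℕ → ℕ) (hg : ∀ j, j < n → g j < n)
    (hinj : ∀ a b, a < n → b < n → g a = g b → a = b)
    (j : ℕ) (hj : j < n) :
    (pvOrbit g j).card = Function.minimalPeriod g j := by
  rw [pvOrbit_eq_path n g hg hinj j hj,
    List.toFinset_card_of_nodup (pvPath_nodup g j _ le_rfl)]
  simp [pvPath]

-- ---------- Part II: the per-cycle cost and the cycle-sum function pvF ----------

noncomputable def pvMinW (W : ℕ → Int) (C : Finset ℕ) : Int :=
  if h : C.Nonempty then C.inf' h W else 0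

noncomputable def pvCost (W : ℕ → Int) (C : Finset ℕ) : Int :=
  (∑ j ∈ C, W j) + ((C.card : Int) - 2) * pvMinW W C

lemma pvCost_singleton (W : ℕ → Int) (j : ℕ) : pvCost W {j} = 0 := by
  simp [pvCost, pvMinW]

noncomputable def pvF (g : ℕ → ℕ) (W : ℕ → Int) (U : Finset ℕ) : Int :=
  if h : U.Nonempty then
    pvCost W (pvOrbit g (U.min' h)) + pvF g W (U \ pvOrbit g (U.min' h))
  else 0
termination_by U.card
decreasing_by
  apply Finset.card_lt_card
  rw [Finset.ssubset_iff_of_subset Finset.sdiff_subset]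
  exact ⟨U.min' h, Finset.min'_mem U h, by simp [pvOrbit_self]⟩

lemma pvF_empty (g : ℕ → ℕ) (W : ℕ → Int) : pvF g W ∅ = 0 := by
  rw [pvF]; simp

lemma pvF_erase (n : ℕ) (g : ℕ → ℕ) (hg : ∀ j, j < n → g j < n)
    (hinj : ∀ a b, a < n → b < n → g a = g b → a = b) (W : ℕ → Int) :
    ∀ (N : ℕ) (U : Finset ℕ), U.card ≤ N → (∀ j ∈ U, j < n) →
    (∀ j ∈ U, pvOrbit g j ⊆ U) → ∀ x ∈ U,
    pvF g W U = pvCost W (pvOrbit g x) + pvF g W (U \ pvOrbit g x) := by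
  intro N
  induction N with
  | zero =>
    intro U hcard hrange hclosed x hx
    have : U = ∅ := Finset.card_eq_zero.1 (by omega)
    subst this; simp at hx
  | succ N ih =>
    intro U hcard hrange hclosed x hx
    have hUne : U.Nonempty := ⟨x, hx⟩
    set m := U.min' hUne with hm
    have hmU : m ∈ U := U.min'_mem hUne
    by_cases hOx : pvOrbit g x = pvOrbit g m
    · rw [pvF, dif_pos hUne, ← hm, hOx]
    · -- different orbits, hence disjoint
      have hxn : x < n := hrange x hx
      have hmn : m < n := hrange m hmU
      have hdisj : ∀ y, y ∈ pvOrbit g x → y ∈ pvOrbit g m → False := by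
        intro y hy1 hy2
        have e1 := pvOrbit_eq_of_mem n g hg hinj x hxn y hy1
        have e2 := pvOrbit_eq_of_mem n g hg hinj m hmn y hy2
        exact hOx (e1 ▸ e2 ▸ rfl : pvOrbit g x = pvOrbit g m)
      have hxOm : x ∉ pvOrbit g m := fun h => hdisj x (pvOrbit_self g x) h
      have hmOx : m ∉ pvOrbit g x := fun h => hdisj m h (pvOrbit_self g m)
      set U' := U \ pvOrbit g m with hU'
      have hxU' : x ∈ U' := Finset.mem_sdiff.2 ⟨hx, hxOm⟩
      have hcard' : U'.card ≤ N := by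
        have : U'.card < U.card := by
          apply Finset.card_lt_card
          rw [Finset.ssubset_iff_of_subset Finset.sdiff_subset]
          exact ⟨m, hmU, by simp [pvOrbit_self]⟩
        omega
      have hrange' : ∀ j ∈ U', j < n := fun j hj => hrange j (Finset.mem_sdiff.1 hj).1
      have hclosed' : ∀ j ∈ U', pvOrbit g j ⊆ U' := by
        intro j hj y hy
        obtain ⟨hjU, hjOm⟩ := Finset.mem_sdiff.1 hj
        have hjn : j < n := hrange j hjU
        refine Finset.mem_sdiff.2 ⟨hclosed j hjU hy, ?_⟩
        intro hyOm
        have e1 := pvOrbit_eq_of_mem n g hg hinj j hjn y hy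
        have e2 := pvOrbit_eq_of_mem n g hg hinj m hmn y hyOm
        exact hjOm (by rw [← e2, e1]; exact pvOrbit_self g j)
      have hL : pvF g W U = pvCost W (pvOrbit g m) + pvF g W U' := by
        rw [pvF, dif_pos hUne, ← hm]
      have hI : pvF g W U' = pvCost W (pvOrbit g x) + pvF g W (U' \ pvOrbit g x) :=
        ih U' hcard' hrange' hclosed' x hxU'
      have hUx_ne : (U \ pvOrbit g x).Nonempty := ⟨m, Finset.mem_sdiff.2 ⟨hmU, hmOx⟩⟩
      have hminUx : (U \ pvOrbit g x).min' hUx_ne = m := by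
        apply le_antisymm
        · exact Finset.min'_le _ m (Finset.mem_sdiff.2 ⟨hmU, hmOx⟩)
        · apply Finset.le_min'
          intro y hy
          exact hm ▸ U.min'_le y (Finset.mem_sdiff.1 hy).1
      have hR : pvF g W (U \ pvOrbit g x)
          = pvCost W (pvOrbit g m) + pvF g W ((U \ pvOrbit g x) \ pvOrbit g m) := by
        rw [pvF, dif_pos hUx_ne, hminUx]
      have hcomm : (U \ pvOrbit g x) \ pvOrbit g m = U' \ pvOrbit g x := by
        rw [hU', sdiff_right_comm]
      rw [hL, hI, hR, hcomm]
      ring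


lemma pvF_fixed (g : ℕ → ℕ) (W : ℕ → Int) :
    ∀ (N : ℕ) (U : Finset ℕ), U.card ≤ N → (∀ j ∈ U, g j = j) → pvF g W U = 0 := by
  intro N
  induction N with
  | zero =>
    intro U hcard _
    have : U = ∅ := Finset.card_eq_zero.1 (by omega)
    simp [this, pvF_empty]
  | succ N ih =>
    intro U hcard hfix
    by_cases hne : U.Nonempty
    · have hmU := U.min'_mem hne
      have horb : pvOrbit g (U.min' hne) = {U.min' hne} :=
        pvOrbit_fixed g _ (hfix _ hmU)
      rw [pvF, dif_pos hne, horb, pvCost_singleton]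
      have hcard' : (U \ {U.min' hne}).card ≤ N := by
        have : (U \ ({U.min' hne} : Finset ℕ)).card < U.card := by
          apply Finset.card_lt_card
          rw [Finset.ssubset_iff_of_subset Finset.sdiff_subset]
          exact ⟨U.min' hne, hmU, by simp⟩
        omega
      rw [ih _ hcard' (fun j hj => hfix j (Finset.mem_sdiff.1 hj).1)]
      ring
    · rw [Finset.not_nonempty_iff_eq_empty] at hne
      simp [hne, pvF_empty]

-- ---------- Part III: the concrete permutation data ----------

def pvOneTo (n : ℕ) : List Int := (List.range n).map (fun (k : Nat) => (k : Int) + 1)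

def pvE (l : List Int) (j : ℕ) : Int := l.getD j 0
def pvP (l : List Int) (v : Int) : ℕ := List.idxOf v l
def pvG (kp kk : List Int) (j : ℕ) : ℕ := pvP kp (pvE kk j)
def pvWv (wag : List Int) (v : Int) : Int := wag.getD (v - 1).toNat 0
def pvWgt (kp wag : List Int) (j : ℕ) : Int := pvWv wag (pvE kp j)

structure PvH (kp kk wag : List Int) : Prop where
  lenp : kp.length = wag.length
  lenk : kk.length = wag.length
  ndp : kp.Nodup
  ndk : kk.Nodup
  memp : ∀ v : Int, v ∈ kp ↔ 1 ≤ v ∧ v ≤ (wag.length : Int)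
  memk : ∀ v : Int, v ∈ kk ↔ 1 ≤ v ∧ v ≤ (wag.length : Int)
  wlt : ∀ w ∈ wag, w < 7000

lemma pvOneTo_nodup (n : ℕ) : (pvOneTo n).Nodup := by
  unfold pvOneTo
  apply List.Nodup.map_on _ List.nodup_range
  intro a _ b _ h
  omega

lemma pvOneTo_mem (n : ℕ) (v : Int) : v ∈ pvOneTo n ↔ 1 ≤ v ∧ v ≤ (n : Int) := by
  simp only [pvOneTo, List.mem_map, List.mem_range]
  constructor
  · rintro ⟨k, hk, rfl⟩
    constructor <;> [omega; exact_mod_cast by omega]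
  · intro ⟨h1, h2⟩
    refine ⟨(v - 1).toNat, by omega, by omega⟩

lemma pvH_of_perm (kp kk wag : List Int)
    (hp : kp.Perm (pvOneTo wag.length)) (hk : kk.Perm (pvOneTo wag.length))
    (hw : ∀ w ∈ wag, w < 7000) : PvH kp kk wag := by
  refine ⟨?_, ?_, ?_, ?_, ?_, ?_, hw⟩
  · rw [hp.length_eq]; simp [pvOneTo]
  · rw [hk.length_eq]; simp [pvOneTo]
  · exact hp.nodup_iff.2 (pvOneTo_nodup _)
  · exact hk.nodup_iff.2 (pvOneTo_nodup _)
  · intro v; rw [hp.mem_iff, pvOneTo_mem]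
  · intro v; rw [hk.mem_iff, pvOneTo_mem]

-- basic inverse facts
lemma pvE_getElem (l : List Int) (j : ℕ) (hj : j < l.length) : pvE l j = l[j] := by
  simp [pvE, List.getD_eq_getElem?_getD, List.getElem?_eq_getElem hj]

lemma pvE_mem (l : List Int) (j : ℕ) (hj : j < l.length) : pvE l j ∈ l := by
  rw [pvE_getElem l j hj]; exact List.getElem_mem hj

lemma pvP_lt (l : List Int) (v : Int) (hv : v ∈ l) : pvP l v < l.length := by
  simp [pvP, List.idxOf_lt_length_iff, hv]

lemma pvE_pvP (l : List Int) (v : Int) (hv : v ∈ l) : pvE l (pvP l v) = v := by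
  have h := pvP_lt l v hv
  rw [pvE_getElem l _ h]
  exact List.getElem_idxOf h

lemma pvP_pvE (l : List Int) (hnd : l.Nodup) (j : ℕ) (hj : j < l.length) :
    pvP l (pvE l j) = j := by
  rw [pvE_getElem l j hj]
  exact hnd.idxOf_getElem j hj

lemma pvE_inj (l : List Int) (hnd : l.Nodup) (j j' : ℕ) (hj : j < l.length)
    (hj' : j' < l.length) (h : pvE l j = pvE l j') : j = j' := by
  have := pvP_pvE l hnd j hj
  rw [h, pvP_pvE l hnd j' hj'] at this
  omega

lemma pvE_kk_mem_kp (kp kk wag : List Int) (H : PvH kp kk wag) (j : ℕ)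
    (hj : j < wag.length) : pvE kk j ∈ kp := by
  have hm : pvE kk j ∈ kk := pvE_mem kk j (by rw [H.lenk]; omega)
  exact (H.memp _).2 ((H.memk _).1 hm)

lemma pvG_lt (kp kk wag : List Int) (H : PvH kp kk wag) (j : ℕ) (hj : j < wag.length) :
    pvG kp kk j < wag.length := by
  have := pvP_lt kp (pvE kk j) (pvE_kk_mem_kp kp kk wag H j hj)
  rw [H.lenp] at this
  exact this

lemma pvG_inj (kp kk wag : List Int) (H : PvH kp kk wag) (a b : ℕ)
    (ha : a < wag.length) (hb : b < wag.length) (h : pvG kp kk a = pvG kp kk b) : a = b := by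
  have h1 : pvE kk a = pvE kk b := by
    have e1 := pvE_pvP kp (pvE kk a) (pvE_kk_mem_kp kp kk wag H a ha)
    have e2 := pvE_pvP kp (pvE kk b) (pvE_kk_mem_kp kp kk wag H b hb)
    rw [← e1, ← e2]
    exact congrArg (pvE kp) h
  exact pvE_inj kk H.ndk a b (by rw [H.lenk]; omega) (by rw [H.lenk]; omega) h1

-- ---------- Part IV: list bridges ----------

def pvMap (n : ℕ) (f : ℕ → Int) : List Int := (List.range n).map f

lemma pvMap_getElem (n : ℕ) (f : ℕ → Int) (j : ℕ) (hj : j < n) :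
    (pvMap n f)[j]'(by simp [pvMap]; omega) = f j := by simp [pvMap]

lemma pvMap_getD (n : ℕ) (f : ℕ → Int) (j : ℕ) (hj : j < n) :
    (pvMap n f).getD j 0 = f j := by
  rw [List.getD_eq_getElem _ 0 (by simp [pvMap]; omega), pvMap_getElem n f j hj]

lemma pvMap_set (n : ℕ) (f : ℕ → Int) (q : ℕ) (v : Int) (hq : q < n) :
    (pvMap n f).set q v = pvMap n (fun i => if i = q then v else f i) := by
  apply List.ext_getElem
  · simp [pvMap]
  · intro i h1 h2
    have hi : i < n := by simp [pvMap] at h2; omega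
    rw [pvMap_getElem n _ i hi, List.getElem_set]
    by_cases h : q = i
    · simp [h]
    · rw [if_neg h, if_neg (fun hh => h hh.symm), pvMap_getElem n f i hi]

lemma pvMap_congr (n : ℕ) (f f' : ℕ → Int) (h : ∀ j, j < n → f j = f' j) :
    pvMap n f = pvMap n f' := by
  apply List.ext_getElem
  · simp [pvMap]
  · intro i h1 h2
    have hi : i < n := by simp [pvMap] at h1; omega
    rw [pvMap_getElem n f i hi, pvMap_getElem n f' i hi, h i hi]

lemma pvMap_eq_self (l : List Int) : pvMap l.length (pvE l) = l := by
  apply List.ext_getElem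
  · simp [pvMap]
  · intro i h1 h2
    rw [pvMap_getElem _ _ i (by simpa [pvMap] using h1)]
    exact pvE_getElem l i h2

lemma pvMap_eq_iff (n : ℕ) (f : ℕ → Int) (l : List Int) (hlen : l.length = n) :
    pvMap n f = l ↔ ∀ j, j < n → f j = pvE l j := by
  constructor
  · intro h j hj
    have hh : pvE (pvMap n f) j = pvE l j := by rw [h]
    rw [← hh]
    exact (pvMap_getD n f j hj).symm
  · intro h
    apply List.ext_getElem
    · simp [pvMap, hlen]
    · intro i h1 h2
      have hi : i < n := by simp [pvMap] at h1; omega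
      rw [pvMap_getElem n f i hi, h i hi]
      exact pvE_getElem l i h2

lemma pvIndex?_first (xs : List Int) (v : Int) :
    ∀ (q : ℕ) (hq : q < xs.length), xs[q] = v → (∀ j (hj : j < q), xs[j]'(by omega) ≠ v) →
    PySem.List.index? xs v = some q := by
  induction xs with
  | nil => intro q hq; simp at hq
  | cons x t ih =>
    intro q hq hv hb
    cases q with
    | zero =>
      have hxv : x = v := by simpa using hv
      subst hxv
      exact PySem.List.index?_cons_self x t
    | succ q =>
      have hx : x ≠ v := by
        have := hb 0 (by omega)
        simpa using this
      rw [PySem.List.index?_cons_of_ne t hx]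
      have := ih q (by simpa using hq) (by simpa using hv)
        (fun j hj => by simpa using hb (j+1) (by omega))
      rw [this]
      simp

lemma pvMin?_eq (xs : List Int) (v : Int) (hmem : v ∈ xs) (hle : ∀ y ∈ xs, v ≤ y) :
    PySem.List.min? xs (fun x => x) = some v := by
  cases hmin : PySem.List.min? xs (fun x => x) with
  | none =>
    rw [PySem.List.min?_eq_none_iff] at hmin
    subst hmin; simp at hmem
  | some m =>
    have hmmem := PySem.List.min?_mem hmin
    have hmle := PySem.List.min?_isMin hmin
    have : m = v := le_antisymm (hmle v hmem) (hle m hmmem)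
    rw [this]


-- ---------- Part V: A-side state lists and per-iteration computations ----------

def pvKolej (kp kk wag : List Int) (S : Finset ℕ) (q : ℕ) (m : Int) : List Int :=
  pvMap wag.length (fun j => if j ∈ S then pvE kk j else if j = q then m else pvE kp j)

def pvKolejC (kp kk wag : List Int) (S : Finset ℕ) : List Int :=
  pvMap wag.length (fun j => if j ∈ S then pvE kk j else pvE kp j)

def pvWagaL (kk wag : List Int) (S : Finset ℕ) : List Int :=
  pvMap wag.length (fun i => if i ∈ S.image (fun j => (pvE kk j - 1).toNat) then 7000 else wag.getD i 0)

lemma pvLoop_done (kk w : List Int) (s : Int) (fuel : ℕ) :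
    metoda1Loop kk fuel kk w s = s := by
  cases fuel with
  | zero => rfl
  | succ fuel => simp [metoda1Loop]

lemma pvIndex?_pvMap (n : ℕ) (f : ℕ → Int) (v : Int) (j0 : ℕ) (hj0 : j0 < n)
    (hv : f j0 = v) (huniq : ∀ j, j < n → f j = v → j = j0) :
    PySem.List.index? (pvMap n f) v = some j0 := by
  apply pvIndex?_first (pvMap n f) v j0 (by simp [pvMap]; omega)
  · rw [pvMap_getElem n f j0 hj0]; exact hv
  · intro j hj
    have hjn : j < n := by omega
    rw [pvMap_getElem n f j hjn]
    intro hc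
    have := huniq j hjn hc
    omega

-- the elephant m is lex-minimal among the non-retired (not in pvE kk '' S) elephants
def pvLexMin (kp kk wag : List Int) (S : Finset ℕ) (m : Int) : Prop :=
  ∀ v ∈ kp, (∀ j ∈ S, pvE kk j ≠ v) →
    pvWv wag m < pvWv wag v ∨ (pvWv wag m = pvWv wag v ∧ m ≤ v)

lemma pvWv_lt_7000 (kp kk wag : List Int) (H : PvH kp kk wag) (m : Int) (hm : m ∈ kp) :
    pvWv wag m < 7000 := by
  have hb := (H.memp m).1 hm
  have hlt : (m - 1).toNat < wag.length := by omega
  apply H.wlt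
  unfold pvWv
  rw [List.getD_eq_getElem wag 0 hlt]
  exact List.getElem_mem hlt

lemma pvWagaL_getElem (kk wag : List Int) (S : Finset ℕ) (i : ℕ) (hi : i < wag.length) :
    (pvWagaL kk wag S)[i]'(by simp [pvWagaL, pvMap]; omega)
      = if i ∈ S.image (fun j => (pvE kk j - 1).toNat) then 7000 else wag.getD i 0 := by
  unfold pvWagaL
  rw [pvMap_getElem _ _ i hi]

-- the distinguished undone index (m-1) holds weight pvWv wag m
lemma pvWagaL_at_m (kp kk wag : List Int) (H : PvH kp kk wag) (S : Finset ℕ) (m : Int)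
    (hm : m ∈ kp) (hSn : ∀ j ∈ S, j < wag.length)
    (hund : ∀ j ∈ S, pvE kk j ≠ m) :
    (m - 1).toNat ∉ S.image (fun j => (pvE kk j - 1).toNat) := by
  intro hc
  rw [Finset.mem_image] at hc
  obtain ⟨j, hjS, hji⟩ := hc
  have hjlt := hSn j hjS
  have htj : pvE kk j ∈ kk := pvE_mem kk j (by rw [H.lenk]; omega)
  have hb1 := (H.memk _).1 htj
  have hb2 := (H.memp m).1 hm
  exact hund j hjS (by omega)

lemma pvMinWaga (kp kk wag : List Int) (H : PvH kp kk wag) (S : Finset ℕ) (m : Int)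
    (hm : m ∈ kp) (hSn : ∀ j ∈ S, j < wag.length)
    (hund : ∀ j ∈ S, pvE kk j ≠ m) (hlex : pvLexMin kp kk wag S m) :
    PySem.List.min? (pvWagaL kk wag S) (fun x => x) = some (pvWv wag m) := by
  have hb := (H.memp m).1 hm
  have hmlt : (m - 1).toNat < wag.length := by omega
  have hnotdone := pvWagaL_at_m kp kk wag H S m hm hSn hund
  apply pvMin?_eq
  · have : (pvWagaL kk wag S)[(m-1).toNat]'(by simp [pvWagaL, pvMap]; omega) = pvWv wag m := by
      rw [pvWagaL_getElem kk wag S _ hmlt, if_neg hnotdone]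
      rfl
    rw [← this]
    exact List.getElem_mem _
  · intro y hy
    simp only [pvWagaL, pvMap, List.mem_map, List.mem_range] at hy
    obtain ⟨i, hin, hfy⟩ := hy
    by_cases hd : i ∈ S.image (fun j => (pvE kk j - 1).toNat)
    · rw [if_pos hd] at hfy
      have := pvWv_lt_7000 kp kk wag H m hm
      omega
    · rw [if_neg hd] at hfy
      have hv : ((i : Int) + 1) ∈ kp := (H.memp _).2 (by constructor <;> omega)
      have hvund : ∀ j ∈ S, pvE kk j ≠ (i : Int) + 1 := by
        intro j hjS hc
        exact hd (Finset.mem_image.2 ⟨j, hjS, by omega⟩)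
      have hwv : pvWv wag ((i : Int) + 1) = y := by
        unfold pvWv
        have : (((i : Int) + 1) - 1).toNat = i := by omega
        rw [this, hfy]
      rcases hlex _ hv hvund with hlt | ⟨heq, _⟩
      · omega
      · omega

lemma pvIdxWaga (kp kk wag : List Int) (H : PvH kp kk wag) (S : Finset ℕ) (m : Int)
    (hm : m ∈ kp) (hSn : ∀ j ∈ S, j < wag.length)
    (hund : ∀ j ∈ S, pvE kk j ≠ m) (hlex : pvLexMin kp kk wag S m) :
    PySem.List.index? (pvWagaL kk wag S) (pvWv wag m) = some ((m - 1).toNat) := by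
  have hb := (H.memp m).1 hm
  have hmlt : (m - 1).toNat < wag.length := by omega
  have hnotdone := pvWagaL_at_m kp kk wag H S m hm hSn hund
  apply pvIndex?_first _ _ _ (by simp [pvWagaL, pvMap]; omega)
  · rw [pvWagaL_getElem kk wag S _ hmlt, if_neg hnotdone]; rfl
  · intro i hi
    have hin : i < wag.length := by omega
    rw [pvWagaL_getElem kk wag S i hin]
    by_cases hd : i ∈ S.image (fun j => (pvE kk j - 1).toNat)
    · rw [if_pos hd]
      have := pvWv_lt_7000 kp kk wag H m hm
      omega
    · rw [if_neg hd]
      intro hc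
      have hv : ((i : Int) + 1) ∈ kp := (H.memp _).2 (by constructor <;> omega)
      have hvund : ∀ j ∈ S, pvE kk j ≠ (i : Int) + 1 := by
        intro j hjS hcc
        exact hd (Finset.mem_image.2 ⟨j, hjS, by omega⟩)
      have hwv : pvWv wag ((i : Int) + 1) = wag.getD i 0 := by
        unfold pvWv
        have : (((i : Int) + 1) - 1).toNat = i := by omega
        rw [this]
      rcases hlex _ hv hvund with hlt | ⟨heq, hle⟩
      · omega
      · omega

lemma pvWagaL_set (kp kk wag : List Int) (H : PvH kp kk wag) (S : Finset ℕ) (q : ℕ)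
    (hq : q < wag.length) :
    PySem.List.pySetD (pvWagaL kk wag S) (pvE kk q - 1) 7000
      = pvWagaL kk wag (insert q S) := by
  have htq : pvE kk q ∈ kk := pvE_mem kk q (by rw [H.lenk]; omega)
  have hb := (H.memk _).1 htq
  rw [PySem.List.pySetD_of_nonneg _ _ (show (0:Int) ≤ pvE kk q - 1 by omega)]
  unfold pvWagaL
  rw [pvMap_set _ _ _ _ (by omega)]
  apply pvMap_congr
  intro i hi
  by_cases hiq : i = (pvE kk q - 1).toNat
  · rw [if_pos hiq, if_pos]
    rw [Finset.mem_image]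
    exact ⟨q, Finset.mem_insert_self q S, hiq.symm⟩
  · rw [if_neg hiq]
    by_cases hd : i ∈ S.image (fun j => (pvE kk j - 1).toNat)
    · rw [if_pos hd, if_pos]
      rw [Finset.mem_image] at hd ⊢
      obtain ⟨j, hj, hji⟩ := hd
      exact ⟨j, Finset.mem_insert_of_mem hj, hji⟩
    · rw [if_neg hd, if_neg]
      intro hc
      rw [Finset.mem_image] at hc
      obtain ⟨j, hj, hji⟩ := hc
      rcases Finset.mem_insert.1 hj with rfl | hjS
      · exact hiq hji.symm
      · exact hd (Finset.mem_image.2 ⟨j, hjS, hji⟩)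

lemma pvPath_succ (g : ℕ → ℕ) (j k : ℕ) :
    (pvPath g j (k+1)).toFinset = insert (g^[k] j) (pvPath g j k).toFinset := by
  unfold pvPath
  rw [List.range_succ]
  ext x
  simp [or_comm]


lemma pvA_walk (kp kk wag : List Int) (H : PvH kp kk wag)
    (D : Finset ℕ) (hDn : ∀ j ∈ D, j < wag.length)
    (hDcl : ∀ j ∈ D, pvOrbit (pvG kp kk) j ⊆ D)
    (q0 : ℕ) (hq0 : q0 < wag.length) (hq0D : q0 ∉ D)
    (hlex : pvLexMin kp kk wag D (pvE kp q0)) :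
    ∀ (r k : ℕ), k + r + 1 = Function.minimalPeriod (pvG kp kk) q0 →
    ∀ (fuel : ℕ) (suma : Int),
    metoda1Loop kk (fuel + r + 1)
        (pvKolej kp kk wag (D ∪ (pvPath (pvG kp kk) q0 k).toFinset) ((pvG kp kk)^[k] q0) (pvE kp q0))
        (pvWagaL kk wag (D ∪ (pvPath (pvG kp kk) q0 k).toFinset)) suma
      = metoda1Loop kk fuel
          (pvKolejC kp kk wag (D ∪ pvOrbit (pvG kp kk) q0))
          (pvWagaL kk wag (D ∪ pvOrbit (pvG kp kk) q0))
          (suma + ((r : Int) * pvWgt kp wag q0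
              + ((List.range r).map (fun i => pvWgt kp wag ((pvG kp kk)^[k+1+i] q0))).sum)) := by
  -- shared context
  have hlen : kp.length = wag.length := H.lenp
  have hlenk : kk.length = wag.length := H.lenk
  set n := wag.length with hn
  set g := pvG kp kk with hgdef
  have hg : ∀ j, j < n → g j < n := fun j hj => pvG_lt kp kk wag H j hj
  have hginj : ∀ a b, a < n → b < n → g a = g b → a = b :=
    fun a b ha hb h => pvG_inj kp kk wag H a b ha hb h
  set per := Function.minimalPeriod g q0 with hperdef
  have hperpos : 0 < per :=
    Function.minimalPeriod_pos_of_mem_periodicPts (pvPeriodic n g hg hginj q0 hq0)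
  have hiter : ∀ k, g^[k] q0 < n := fun k => pvIter_lt n g hg q0 hq0 k
  have hinjIo : ∀ a b, a < per → b < per → g^[a] q0 = g^[b] q0 → a = b := by
    intro a b ha hb h
    exact Function.iterate_injOn_Iio_minimalPeriod (by exact ha) (by exact hb) h
  set m := pvE kp q0 with hmdef
  have hm_mem : m ∈ kp := pvE_mem kp q0 (by omega)
  have hmb := (H.memp m).1 hm_mem
  have hq0pm : pvP kp m = q0 := pvP_pvE kp H.ndp q0 (by omega)
  have hOD : ∀ x ∈ pvOrbit g q0, x ∉ D := by
    intro x hx hxD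
    exact hq0D (hDcl x hxD ((pvOrbit_eq_of_mem n g hg hginj q0 hq0 x hx) ▸ pvOrbit_self g q0))
  have horbpath : pvOrbit g q0 = (pvPath g q0 per).toFinset :=
    pvOrbit_eq_path n g hg hginj q0 hq0
  have hiter_orb : ∀ k, g^[k] q0 ∈ pvOrbit g q0 := fun k => pvIter_mem_pvOrbit n g hg hginj q0 hq0 k
  have hperiter : g^[per] q0 = q0 := Function.iterate_minimalPeriod
  -- membership in kk ↔ target m characterisation
  have htkp : ∀ j, j < n → pvE kk j ∈ kp := fun j hj => pvE_kk_mem_kp kp kk wag H j hj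
  have hgq0 : ∀ j, j < n → (pvE kk j = m ↔ g j = q0) := by
    intro j hj
    constructor
    · intro h; rw [hgdef]; unfold pvG; rw [h, hmdef]
      exact hq0pm
    · intro h
      have : pvE kp (g j) = pvE kk j := by
        rw [hgdef]; unfold pvG; exact pvE_pvP kp _ (htkp j hj)
      rw [h] at this
      rw [hmdef]
      exact this.symm
  -- facts parameterised by the walk step k  (S k := D ∪ path k)
  have hpath_mem : ∀ k a, a < k → g^[a] q0 ∈ (pvPath g q0 k).toFinset := by
    intro k a ha
    simp [pvPath]
    exact ⟨a, ha, rfl⟩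
  have hpath_elim : ∀ k x, x ∈ (pvPath g q0 k).toFinset → ∃ a, a < k ∧ g^[a] q0 = x := by
    intro k x hx
    simp [pvPath] at hx
    obtain ⟨a, ha, hax⟩ := hx
    exact ⟨a, ha, hax.symm⟩
  have hSn : ∀ k, ∀ j ∈ D ∪ (pvPath g q0 k).toFinset, j < n := by
    intro k j hj
    rcases Finset.mem_union.1 hj with h | h
    · exact hDn j h
    · obtain ⟨a, _, rfl⟩ := hpath_elim k j h
      exact hiter a
  have hund : ∀ k, k ≤ per - 1 → ∀ j ∈ D ∪ (pvPath g q0 k).toFinset, pvE kk j ≠ m := by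
    intro k hk j hj hc
    have hjn : j < n := hSn k j hj
    have hgj : g j = q0 := (hgq0 j hjn).1 hc
    rcases Finset.mem_union.1 hj with h | h
    · have hq0orb : q0 ∈ pvOrbit g j :=
        hgj ▸ pvOrbit_gclosed n g hg hginj j hjn j (pvOrbit_self g j)
      exact hq0D (hDcl j h hq0orb)
    · obtain ⟨a, ha, rfl⟩ := hpath_elim k j h
      have h2 : g^[a+1] q0 = g^[0] q0 := by
        rw [Function.iterate_succ_apply']
        simpa using hgj
      have := hinjIo (a+1) 0 (by omega) (by omega) h2
      omega
  have hqnotS : ∀ k, k < per → g^[k] q0 ∉ D ∪ (pvPath g q0 k).toFinset := by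
    intro k hk hmem
    rcases Finset.mem_union.1 hmem with h | h
    · exact hOD _ (hiter_orb k) h
    · obtain ⟨a, ha, hax⟩ := hpath_elim k _ h
      have := hinjIo a k (by omega) hk hax
      omega
  have hlexS : ∀ k, pvLexMin kp kk wag (D ∪ (pvPath g q0 k).toFinset) m := by
    intro k v hv hvund
    exact hlex v hv (fun j hj => hvund j (Finset.mem_union_left _ hj))
  have hcast : ((m - 1).toNat : Int) + 1 = m := by omega
  have hidxM : ∀ k, k < per →
      PySem.List.index?
        (pvKolej kp kk wag (D ∪ (pvPath g q0 k).toFinset) (g^[k] q0) m) m = some (g^[k] q0) := by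
    intro k hk
    unfold pvKolej
    apply pvIndex?_pvMap _ _ _ _ (by have := hiter k; omega)
    · rw [if_neg (hqnotS k hk), if_pos rfl]
    · intro j hjn hj
      by_cases hjS : j ∈ D ∪ (pvPath g q0 k).toFinset
      · rw [if_pos hjS] at hj
        exact absurd hj (hund k (by omega) j hjS)
      · rw [if_neg hjS] at hj
        by_cases hjq : j = g^[k] q0
        · exact hjq
        · rw [if_neg hjq] at hj
          have hj0 : j = q0 := by
            have := pvP_pvE kp H.ndp j (by omega)
            rw [hj] at this
            rw [← this, hq0pm]
          subst hj0
          rcases Nat.eq_zero_or_pos k with rfl | hkpos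
          · simp at hjq
          · exact absurd (Finset.mem_union_right _ (hpath_mem k 0 (by omega))) hjS
  have hgetkk : ∀ q, q < n → PySem.List.pyGet? kk ((q : ℕ) : Int) = some (pvE kk q) := by
    intro q hq
    rw [PySem.List.pyGet?_natCast, List.getElem?_eq_getElem (by omega),
      pvE_getElem kk q (by omega)]
  have hidxKKm : PySem.List.index? kk m = some (g^[per-1] q0) := by
    have hql : g^[per-1] q0 < n := hiter _
    have htql : pvE kk (g^[per-1] q0) = m := by
      apply (hgq0 _ hql).2
      have h1 : g^[per-1+1] q0 = q0 := by
        rw [show per - 1 + 1 = per by omega]; exact hperiter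
      rw [Function.iterate_succ_apply'] at h1
      exact h1
    apply pvIndex?_first kk m (g^[per-1] q0) (by rw [hlenk]; exact hql)
    · rw [← pvE_getElem kk _ (by omega)]
      exact htql
    · intro j hj hc
      have hjn : j < kk.length := by omega
      have : pvE kk j = pvE kk (g^[per-1] q0) := by
        rw [pvE_getElem kk j hjn, hc, htql]
      have := pvE_inj kk H.ndk j _ hjn (by omega) this
      omega
  -- the induction over the remaining path length r
  intro r
  induction r with
  | zero =>
    intro k hkper fuel suma
    have hk : k < per := by omega
    have hkeq : k = per - 1 := by omega
    set q := g^[k] q0 with hqdef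
    have hqn : q < n := hiter k
    have htq : pvE kk q = m := by
      apply (hgq0 q hqn).2
      have h1 : g^[k+1] q0 = q0 := by
        rw [show k + 1 = per by omega]; exact hperiter
      rw [Function.iterate_succ_apply', ← hqdef] at h1
      exact h1
    have hDO : D ∪ pvOrbit g q0 = insert q (D ∪ (pvPath g q0 k).toFinset) := by
      rw [horbpath, show per = k + 1 by omega, pvPath_succ, Finset.union_insert, hqdef]
    have hlist : pvKolej kp kk wag (D ∪ (pvPath g q0 k).toFinset) q m
        = pvKolejC kp kk wag (D ∪ pvOrbit g q0) := by
      unfold pvKolej pvKolejC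
      apply pvMap_congr
      intro j hj
      rw [hDO]
      by_cases hjq : j = q
      · subst hjq
        rw [if_neg (hqdef ▸ hqnotS k hk), if_pos rfl, if_pos (Finset.mem_insert_self _ _), htq]
      · by_cases hjS : j ∈ D ∪ (pvPath g q0 k).toFinset
        · rw [if_pos hjS, if_pos (Finset.mem_insert_of_mem hjS)]
        · rw [if_neg hjS, if_neg hjq, if_neg (by
            intro hc
            rcases Finset.mem_insert.1 hc with h | h
            · exact hjq h
            · exact hjS h)]
    have hsum0 : suma + ((0 : ℕ) * pvWgt kp wag q0
        + ((List.range 0).map (fun i => pvWgt kp wag (g^[k+1+i] q0))).sum) = suma := by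
      simp
    rw [hsum0]
    by_cases hLkk : pvKolej kp kk wag (D ∪ (pvPath g q0 k).toFinset) q m = kk
    · have hCkk : pvKolejC kp kk wag (D ∪ pvOrbit g q0) = kk := by rw [← hlist]; exact hLkk
      rw [show fuel + 0 + 1 = fuel + 1 by omega]
      simp only [metoda1Loop]
      rw [if_pos hLkk, hCkk, pvLoop_done]
    · -- one no-op iteration retiring the walker m
      have hmin := pvMinWaga kp kk wag H _ m hm_mem (hSn k) (hund k (by omega)) (hlexS k)
      have hidxw := pvIdxWaga kp kk wag H _ m hm_mem (hSn k) (hund k (by omega)) (hlexS k)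
      have hidxm' : PySem.List.index?
          (pvKolej kp kk wag (D ∪ (pvPath g q0 k).toFinset) q m) m = some q := by
        rw [hqdef]; exact hidxM k hk
      have hLf : (pvKolej kp kk wag (D ∪ (pvPath g q0 k).toFinset) q m = kk) = False :=
        eq_false hLkk
      have hidxKKm' : PySem.List.index? kk m = some q := by
        rw [hidxKKm, hqdef, hkeq]
      have hcond2 : (q ≠ q) = False := by simp
      have hsetw : PySem.List.pySetD
          (pvWagaL kk wag (D ∪ (pvPath g q0 k).toFinset)) (m - 1) 7000
          = pvWagaL kk wag (D ∪ pvOrbit g q0) := by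
        rw [← htq, pvWagaL_set kp kk wag H _ q hqn, hDO]
      rw [show fuel + 0 + 1 = fuel + 1 by omega]
      simp only [metoda1Loop, hLf, if_false, hmin, hidxw, hcast, hidxm',
        hgetkk q hqn, htq, hidxKKm', hcond2, hsetw]
      rw [hlist]
  | succ r ih =>
    intro k hkper fuel suma
    have hk : k < per := by omega
    have hk1 : k + 1 < per := by omega
    set q := g^[k] q0 with hqdef
    have hqn : q < n := hiter k
    have htqne : pvE kk q ≠ m := by
      intro hc
      have hgjq : g q = q0 := (hgq0 q hqn).1 hc
      have h2 : g^[k+1] q0 = g^[0] q0 := by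
        rw [Function.iterate_succ_apply', ← hqdef]
        simpa using hgjq
      have := hinjIo (k+1) 0 (by omega) (by omega) h2
      omega
    have hgq : g^[k+1] q0 = g q := by
      rw [Function.iterate_succ_apply', ← hqdef]
    have hgqn : g q < n := hg q hqn
    have hgqne : g q ≠ q := by
      intro hc
      rw [← hgq, hqdef] at hc
      have := hinjIo (k+1) k (by omega) (by omega) hc
      omega
    have hgqnotS : g q ∉ D ∪ (pvPath g q0 k).toFinset := by
      rw [← hgq]
      intro hc
      rcases Finset.mem_union.1 hc with h | h
      · exact hOD _ (hiter_orb (k+1)) h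
      · obtain ⟨a, ha, hax⟩ := hpath_elim k _ h
        have := hinjIo a (k+1) (by omega) (by omega) hax
        omega
    have hqnS := hqnotS k hk
    have htqkp : pvE kk q ∈ kp := htkp q hqn
    have hEgq : pvE kp (g q) = pvE kk q := by
      rw [hgdef]
      unfold pvG
      exact pvE_pvP kp _ htqkp
    have hLne : pvKolej kp kk wag (D ∪ (pvPath g q0 k).toFinset) q m ≠ kk := by
      intro hc
      unfold pvKolej at hc
      have := (pvMap_eq_iff n _ kk hlenk).1 hc q hqn
      rw [if_neg (hqdef ▸ hqnS), if_pos rfl] at this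
      exact htqne this.symm
    have hmin := pvMinWaga kp kk wag H _ m hm_mem (hSn k) (hund k (by omega)) (hlexS k)
    have hidxw := pvIdxWaga kp kk wag H _ m hm_mem (hSn k) (hund k (by omega)) (hlexS k)
    have hidxT : PySem.List.index?
        (pvKolej kp kk wag (D ∪ (pvPath g q0 k).toFinset) q m) (pvE kk q) = some (g q) := by
      unfold pvKolej
      apply pvIndex?_pvMap _ _ _ _ (by have := hgqn; omega)
      · rw [if_neg hgqnotS, if_neg hgqne]
        exact hEgq
      · intro j hjn hj
        by_cases hjS : j ∈ D ∪ (pvPath g q0 k).toFinset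
        · rw [if_pos hjS] at hj
          have := pvE_inj kk H.ndk j q (by omega) (by omega) hj
          subst this
          exact absurd hjS hqnS
        · rw [if_neg hjS] at hj
          by_cases hjq : j = q
          · rw [if_pos hjq] at hj
            exact absurd hj.symm htqne
          · rw [if_neg hjq] at hj
            have := pvP_pvE kp H.ndp j (by omega)
            rw [hj] at this
            rw [← this, hgdef]
            rfl
    have hqlast_ne : (q ≠ g^[per-1] q0) = True := by
      apply eq_true
      rw [hqdef]
      intro hc
      have := hinjIo k (per-1) (by omega) (by omega) hc
      omega
    have hbtq := (H.memk _).1 (pvE_mem kk q (by omega))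
    have hnotdone : (pvE kk q - 1).toNat
        ∉ (D ∪ (pvPath g q0 k).toFinset).image (fun j => (pvE kk j - 1).toNat) := by
      intro hc
      rw [Finset.mem_image] at hc
      obtain ⟨j, hjS, hji⟩ := hc
      have hjn : j < n := hSn k j hjS
      have hbtj := (H.memk _).1 (pvE_mem kk j (by omega))
      have : pvE kk j = pvE kk q := by omega
      have := pvE_inj kk H.ndk j q (by omega) (by omega) this
      subst this
      exact absurd hjS hqnS
    have hwread : PySem.List.pyGet? (pvWagaL kk wag (D ∪ (pvPath g q0 k).toFinset))
        (pvE kk q - 1) = some (pvWv wag (pvE kk q)) := by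
      rw [PySem.List.pyGet?_of_nonneg _ (by omega)]
      rw [List.getElem?_eq_getElem (by simp [pvWagaL, pvMap]; omega)]
      rw [pvWagaL_getElem kk wag _ _ (by omega), if_neg hnotdone]
      rfl
    have hsetk : ((pvKolej kp kk wag (D ∪ (pvPath g q0 k).toFinset) q m).set q (pvE kk q)).set
          (g q) m
        = pvKolej kp kk wag (D ∪ (pvPath g q0 (k+1)).toFinset) (g^[k+1] q0) m := by
      unfold pvKolej
      rw [pvMap_set _ _ _ _ (by have := hqn; omega), pvMap_set _ _ _ _ (by have := hgqn; omega)]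
      apply pvMap_congr
      intro j hjn
      have hS1 : D ∪ (pvPath g q0 (k+1)).toFinset
          = insert q (D ∪ (pvPath g q0 k).toFinset) := by
        rw [pvPath_succ, Finset.union_insert, hqdef]
      rw [hS1, hgq]
      by_cases hjgq : j = g q
      · have h2 : j ∉ insert q (D ∪ (pvPath g q0 k).toFinset) := by
          subst hjgq
          intro hc
          rcases Finset.mem_insert.1 hc with h | h
          · exact hgqne h
          · exact hgqnotS h
        have h3 : j ≠ q := by subst hjgq; exact hgqne
        subst hjgq
        simp only [if_pos rfl]
        rw [if_neg h2]
        simp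
      · by_cases hjq : j = q
        · subst hjq
          rw [if_neg hjgq, if_pos rfl, if_pos (Finset.mem_insert_self _ _)]
        · rw [if_neg hjgq, if_neg hjq]
          by_cases hjS : j ∈ D ∪ (pvPath g q0 k).toFinset
          · rw [if_pos hjS, if_pos (Finset.mem_insert_of_mem hjS)]
          · rw [if_neg hjS, if_neg hjq, if_neg (by
              intro hc
              rcases Finset.mem_insert.1 hc with h | h
              · exact hjq h
              · exact hjS h), if_neg hjgq]
    have hsetw : PySem.List.pySetD
        (pvWagaL kk wag (D ∪ (pvPath g q0 k).toFinset)) (pvE kk q - 1) 7000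
        = pvWagaL kk wag (D ∪ (pvPath g q0 (k+1)).toFinset) := by
      rw [pvWagaL_set kp kk wag H _ q hqn, pvPath_succ, Finset.union_insert, hqdef]
    have hLf : (pvKolej kp kk wag (D ∪ (pvPath g q0 k).toFinset) q m = kk) = False :=
      eq_false hLne
    have hidxm' : PySem.List.index?
        (pvKolej kp kk wag (D ∪ (pvPath g q0 k).toFinset) q m) m = some q := by
      rw [hqdef]; exact hidxM k hk
    have hih := ih (k+1) (by omega) fuel (suma + (pvWv wag m + pvWv wag (pvE kk q)))
    rw [show fuel + (r+1) + 1 = (fuel + r + 1) + 1 by omega]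
    rw [show fuel + r + 1 = fuel + r + 1 from rfl] at hih
    generalize hF : fuel + r + 1 = F at hih ⊢
    simp only [metoda1Loop, hLf, if_false, hmin, hidxw, hcast, hidxm',
      hgetkk q hqn, hidxT, hidxKKm, hqlast_ne, if_true, hwread, hsetk, hsetw]
    rw [hih]
    congr 1
    have hWgtgq : pvWgt kp wag (g^[k+1] q0) = pvWv wag (pvE kk q) := by
      unfold pvWgt
      rw [hgq, hEgq]
    have hWgtq0 : pvWgt kp wag q0 = pvWv wag m := by
      unfold pvWgt
      rw [hmdef]
    have hshift : ((List.range r).map (fun i => pvWgt kp wag (g^[k+1+(i+1)] q0))).sum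
        = ((List.range r).map (fun i => pvWgt kp wag (g^[k+1+1+i] q0))).sum := by
      congr 1
      apply List.map_congr_left
      intro i _
      congr 2
      omega
    rw [List.range_succ_eq_map]
    simp only [List.map_cons, List.map_map, List.sum_cons, Function.comp_def,
      Nat.succ_eq_add_one]
    rw [show (k + 1 + 0) = k + 1 by omega, hshift, hWgtq0, hWgtgq]
    push_cast
    ring


lemma pvA_top (kp kk wag : List Int) (H : PvH kp kk wag) :
    ∀ (N : ℕ), ∀ (D : Finset ℕ), (Finset.range wag.length \ D).card ≤ N →
    (∀ j ∈ D, j < wag.length) → (∀ j ∈ D, pvOrbit (pvG kp kk) j ⊆ D) →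
    ∀ (suma : Int),
    metoda1Loop kk (N + 1) (pvKolejC kp kk wag D) (pvWagaL kk wag D) suma
      = suma + pvF (pvG kp kk) (pvWgt kp wag) (Finset.range wag.length \ D) := by
  intro N
  induction N using Nat.strong_induction_on with
  | _ N ihN =>
  intro D hcard hDn hDcl suma
  set n := wag.length with hn
  set g := pvG kp kk with hgdef
  have hlen : kp.length = n := H.lenp
  have hlenk : kk.length = n := H.lenk
  have hg : ∀ j, j < n → g j < n := fun j hj => pvG_lt kp kk wag H j hj
  have hginj : ∀ a b, a < n → b < n → g a = g b → a = b :=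
    fun a b ha hb h => pvG_inj kp kk wag H a b ha hb h
  set U := Finset.range n \ D with hU
  have hUn : ∀ j ∈ U, j < n := by
    intro j hj
    have := (Finset.mem_sdiff.1 hj).1
    simpa using this
  have hUD : ∀ j ∈ U, j ∉ D := fun j hj => (Finset.mem_sdiff.1 hj).2
  have hUcl : ∀ j ∈ U, pvOrbit g j ⊆ U := by
    intro j hj y hy
    have hjn := hUn j hj
    rw [Finset.mem_sdiff]
    refine ⟨by simpa using pvOrbit_subset n g hg j hjn y hy, ?_⟩
    intro hyD
    have := pvOrbit_eq_of_mem n g hg hginj j hjn y hy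
    exact hUD j hj (hDcl y hyD (this ▸ pvOrbit_self g j))
  by_cases hdone : pvKolejC kp kk wag D = kk
  · -- every unsettled position is already a fixed point: A exits, pvF vanishes
    have hfix : ∀ j ∈ U, g j = j := by
      intro j hj
      have hjn := hUn j hj
      have := (pvMap_eq_iff n _ kk hlenk).1 hdone j hjn
      rw [if_neg (hUD j hj)] at this
      rw [hgdef]
      unfold pvG
      rw [← this]
      exact pvP_pvE kp H.ndp j (by omega)
    rw [hdone, pvLoop_done, pvF_fixed g (pvWgt kp wag) U.card U le_rfl hfix]
    ring
  · -- pick the lex-minimal undone elephant and resolve its whole cycle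
    have hUne : U.Nonempty := by
      by_contra hc
      rw [Finset.not_nonempty_iff_eq_empty] at hc
      apply hdone
      unfold pvKolejC
      rw [pvMap_eq_iff n _ kk hlenk]
      intro j hj
      by_cases hjD : j ∈ D
      · rw [if_pos hjD]
      · exact absurd (by rw [hU]; exact Finset.mem_sdiff.2 ⟨by simpa using hj, hjD⟩ : j ∈ U)
          (by rw [hc]; simp)
    set Ue := U.image (pvE kp) with hUe
    have hUene : Ue.Nonempty := hUne.image _
    set wmin := (Ue.image (pvWv wag)).min' (hUene.image _) with hwmin
    set cands := Ue.filter (fun v => pvWv wag v = wmin) with hcands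
    have hcne : cands.Nonempty := by
      obtain ⟨w0, hw0, hmin0⟩ := Finset.mem_image.1 ((Ue.image (pvWv wag)).min'_mem (hUene.image _))
      exact ⟨w0, Finset.mem_filter.2 ⟨hw0, hmin0⟩⟩
    set m := cands.min' hcne with hm
    have hmc := Finset.mem_filter.1 (cands.min'_mem hcne)
    have hmUe : m ∈ Ue := hmc.1
    have hmw : pvWv wag m = wmin := hmc.2
    obtain ⟨q0, hq0U, hq0e⟩ := Finset.mem_image.1 hmUe
    have hq0n : q0 < n := hUn q0 hq0U
    have hq0D : q0 ∉ D := hUD q0 hq0U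
    have hq0p : pvP kp m = q0 := by
      rw [← hq0e]
      exact pvP_pvE kp H.ndp q0 (by omega)
    -- weight-minimality over all undone elephants
    have hminle : ∀ v ∈ Ue, pvWv wag wmin ≤ pvWv wag v → True := fun _ _ _ => trivial
    have hwle : ∀ v ∈ Ue, wmin ≤ pvWv wag v := by
      intro v hv
      exact (Ue.image (pvWv wag)).min'_le _ (Finset.mem_image_of_mem _ hv)
    -- retired elephants are exactly the start elephants of settled positions
    have hgD : ∀ j ∈ D, g j ∈ D := by
      intro j hj
      exact hDcl j hj (pvOrbit_gclosed n g hg hginj j (hDn j hj) j (pvOrbit_self g j))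
    have hgDsurj : ∀ j ∈ D, ∃ j' ∈ D, g j' = j := by
      intro j hj
      have himg : D.image g = D := by
        apply Finset.eq_of_subset_of_card_le
        · intro y hy
          obtain ⟨x, hx, rfl⟩ := Finset.mem_image.1 hy
          exact hgD x hx
        · rw [Finset.card_image_of_injOn]
          intro a ha b hb hab
          exact hginj a b (hDn a ha) (hDn b hb) hab
      rw [← himg] at hj
      obtain ⟨x, hx, hxj⟩ := Finset.mem_image.1 hj
      exact ⟨x, hx, hxj⟩
    have hlex : pvLexMin kp kk wag D m := by
      intro v hv hvret
      have hpv : pvP kp v < n := by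
        have := pvP_lt kp v hv
        omega
      have hpvD : pvP kp v ∉ D := by
        intro hc
        obtain ⟨j', hj', hgj'⟩ := hgDsurj _ hc
        apply hvret j' hj'
        have : pvE kp (g j') = pvE kk j' := by
          rw [hgdef]
          unfold pvG
          exact pvE_pvP kp _ (pvE_kk_mem_kp kp kk wag H j' (hDn j' hj'))
        rw [← this, hgj']
        exact pvE_pvP kp v hv
      have hvUe : v ∈ Ue := by
        rw [hUe]
        apply Finset.mem_image.2
        exact ⟨pvP kp v, Finset.mem_sdiff.2 ⟨by simpa using hpv, hpvD⟩, pvE_pvP kp v hv⟩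
      have hle := hwle v hvUe
      rcases lt_or_eq_of_le (hmw ▸ hle) with hlt | heq
      · exact Or.inl hlt
      · refine Or.inr ⟨heq, ?_⟩
        exact cands.min'_le v (Finset.mem_filter.2 ⟨hvUe, by rw [← heq, hmw]⟩)
    -- the phase over the cycle of q0
    have hperpos : 0 < Function.minimalPeriod g q0 :=
      Function.minimalPeriod_pos_of_mem_periodicPts (pvPeriodic n g hg hginj q0 hq0n)
    set per := Function.minimalPeriod g q0 with hper
    have horb : pvOrbit g q0 ⊆ U := hUcl q0 hq0U
    have hcardorb : (pvOrbit g q0).card = per := pvOrbit_card n g hg hginj q0 hq0n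
    have hperle : per ≤ U.card := by
      rw [← hcardorb]
      exact Finset.card_le_card horb
    have hUcard : U.card ≤ N := hcard
    -- start state of the walk equals the clean state
    have hstart : pvKolej kp kk wag (D ∪ (pvPath g q0 0).toFinset) (g^[0] q0) (pvE kp q0)
        = pvKolejC kp kk wag D := by
      unfold pvKolej pvKolejC
      apply pvMap_congr
      intro j hj
      have hDD : D ∪ (pvPath g q0 0).toFinset = D := by simp [pvPath]
      rw [hDD]
      by_cases hjD : j ∈ D
      · rw [if_pos hjD, if_pos hjD]
      · rw [if_neg hjD, if_neg hjD]
        by_cases hjq : j = q0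
        · subst hjq; simp
        · rw [if_neg (by simpa using hjq)]
    have hwstart : pvWagaL kk wag (D ∪ (pvPath g q0 0).toFinset) = pvWagaL kk wag D := by
      have hDD : D ∪ (pvPath g q0 0).toFinset = D := by simp [pvPath]
      rw [hDD]
    have hwalk := pvA_walk kp kk wag H D hDn hDcl q0 hq0n hq0D (hq0e ▸ hlex)
      (per - 1) 0 (by simp only [← hgdef, ← hper]; omega) (N + 1 - per) suma
    rw [hstart, hwstart] at hwalk
    rw [show N + 1 = N + 1 - per + (per - 1) + 1 by omega, hwalk]
    -- the next clean state via the strong induction hypothesis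
    set D' := D ∪ pvOrbit g q0 with hD'
    have hD'n : ∀ j ∈ D', j < n := by
      intro j hj
      rcases Finset.mem_union.1 hj with h | h
      · exact hDn j h
      · exact hUn j (horb h)
    have hD'cl : ∀ j ∈ D', pvOrbit g j ⊆ D' := by
      intro j hj
      rcases Finset.mem_union.1 hj with h | h
      · exact (hDcl j h).trans Finset.subset_union_left
      · rw [pvOrbit_eq_of_mem n g hg hginj q0 hq0n j h]
        exact Finset.subset_union_right
    have hU' : Finset.range n \ D' = U \ pvOrbit g q0 := by
      rw [hD', hU]
      ext x
      simp only [Finset.mem_sdiff, Finset.mem_union]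
      tauto
    have hcard' : (Finset.range n \ D').card ≤ N - per := by
      rw [hU', Finset.card_sdiff, Finset.inter_eq_left.2 horb, hcardorb]
      omega
    have hih := ihN (N - per) (by omega) D' hcard' hD'n hD'cl
      (suma + (((per - 1 : ℕ) : Int) * pvWgt kp wag q0
        + ((List.range (per - 1)).map (fun i => pvWgt kp wag (g^[0+1+i] q0))).sum))
    rw [show N + 1 - per = N - per + 1 by omega]
    simp only [← hgdef]
    rw [hih, hU']
    -- F U = cost(orbit q0) + F (U \ orbit q0)
    have hFU := pvF_erase n g hg hginj (pvWgt kp wag) U.card U le_rfl hUn hUcl q0 hq0U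
    rw [hFU]
    -- cost of the cycle equals what the walk accumulated
    have horbp : pvOrbit g q0 = (pvPath g q0 per).toFinset := by
      rw [hper, hgdef]
      exact pvOrbit_eq_path n (pvG kp kk) hg hginj q0 hq0n
    have hnd : (pvPath g q0 per).Nodup := pvPath_nodup g q0 per (by rw [hper])
    have hsumorb : (∑ j ∈ pvOrbit g q0, pvWgt kp wag j)
        = ((pvPath g q0 per).map (pvWgt kp wag)).sum := by
      rw [horbp]
      rw [List.sum_toFinset _ hnd]
    have hpathsum : ((pvPath g q0 per).map (pvWgt kp wag)).sum
        = pvWgt kp wag q0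
          + ((List.range (per - 1)).map (fun i => pvWgt kp wag (g^[0+1+i] q0))).sum := by
      unfold pvPath
      rw [show per = (per - 1) + 1 by omega, List.range_succ_eq_map]
      simp only [List.map_cons, List.map_map, List.sum_cons, Function.comp_def,
        Nat.succ_eq_add_one, Function.iterate_zero, id_eq]
      rw [show per - 1 + 1 - 1 = per - 1 by omega]
      have hcg : ∀ i ∈ List.range (per - 1),
          pvWgt kp wag (g^[i + 1] q0) = pvWgt kp wag (g^[0 + 1 + i] q0) := by
        intro i _
        congr 2
        omega
      rw [List.map_congr_left hcg]
    have hminw : pvMinW (pvWgt kp wag) (pvOrbit g q0) = pvWgt kp wag q0 := by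
      rw [pvMinW, dif_pos ⟨q0, pvOrbit_self g q0⟩]
      apply le_antisymm
      · exact Finset.inf'_le _ (pvOrbit_self g q0)
      · apply Finset.le_inf'
        intro y hy
        have hyUe : pvE kp y ∈ Ue := Finset.mem_image_of_mem _ (horb hy)
        have := hwle _ hyUe
        unfold pvWgt
        rw [hq0e, hmw]
        exact this
    rw [pvCost, hsumorb, hpathsum, hminw, hcardorb, Nat.cast_sub hperpos]
    push_cast
    ring

-- ---------- Part VI: B-side lemmas ----------

lemma pvA_eq (kp kk wag : List Int) (H : PvH kp kk wag) :
    metoda_1 kp kk wag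
      = pvF (pvG kp kk) (pvWgt kp wag) (Finset.range wag.length) := by
  have htop := pvA_top kp kk wag H wag.length ∅ (by simp) (by simp) (by simp) 0
  have hC : pvKolejC kp kk wag ∅ = kp := by
    unfold pvKolejC
    rw [pvMap_congr _ _ (pvE kp) (fun j hj => by simp)]
    rw [← H.lenp, pvMap_eq_self]
  have hW : pvWagaL kk wag ∅ = wag := by
    unfold pvWagaL
    rw [pvMap_congr _ _ (pvE wag) (fun j hj => by simp [pvE])]
    rw [pvMap_eq_self]
  rw [hC, hW, Finset.sdiff_empty] at htop
  unfold metoda_1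
  rw [htop]
  ring

lemma pvPos_get? (v : Int) :
    ∀ (l : List Int) (s : Int) (d : PySem.Dict Int Int), l.Nodup →
    ((PySem.List.enumerate l s).foldl (fun d iv => d.insert iv.2 iv.1) d).get? v
      = if v ∈ l then some (s + (List.idxOf v l : Int)) else d.get? v := by
  intro l
  induction l with
  | nil => intro s d _; simp [PySem.List.enumerate_nil]
  | cons x t ih =>
    intro s d hnd
    rw [PySem.List.enumerate_cons]
    simp only [List.foldl_cons]
    rw [ih (s+1) _ (List.nodup_cons.1 hnd).2]
    by_cases hvx : v = x
    · subst hvx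
      have hvt : v ∉ t := (List.nodup_cons.1 hnd).1
      rw [if_neg hvt, if_pos (List.mem_cons_self), PySem.Dict.get?_insert_self,
        List.idxOf_cons_self]
      simp
    · by_cases hvt : v ∈ t
      · rw [if_pos hvt, if_pos (List.mem_cons_of_mem _ hvt)]
        have : List.idxOf v (x :: t) = List.idxOf v t + 1 := by
          simp [hvx, Ne.symm hvx]
        rw [this]
        congr 1
        push_cast
        ring
      · rw [if_neg hvt, if_neg (by
          intro hc
          rcases List.mem_cons.1 hc with h | h
          · exact hvx h
          · exact hvt h)]
        exact PySem.Dict.get?_insert_of_ne d _ hvx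

def pvMapB (n : ℕ) (f : ℕ → Bool) : List Bool := (List.range n).map f

lemma pvMapB_getElem (n : ℕ) (f : ℕ → Bool) (j : ℕ) (hj : j < n) :
    (pvMapB n f)[j]'(by simp [pvMapB]; omega) = f j := by simp [pvMapB]

lemma pvMapB_set (n : ℕ) (f : ℕ → Bool) (q : ℕ) (v : Bool) (hq : q < n) :
    (pvMapB n f).set q v = pvMapB n (fun i => if i = q then v else f i) := by
  apply List.ext_getElem
  · simp [pvMapB]
  · intro i h1 h2
    have hi : i < n := by simp [pvMapB] at h2; omega
    rw [pvMapB_getElem n _ i hi, List.getElem_set]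
    by_cases h : q = i
    · simp [h]
    · rw [if_neg h, if_neg (fun hh => h hh.symm), pvMapB_getElem n f i hi]

lemma pvMapB_congr (n : ℕ) (f f' : ℕ → Bool) (h : ∀ j, j < n → f j = f' j) :
    pvMapB n f = pvMapB n f' := by
  apply List.ext_getElem
  · simp [pvMapB]
  · intro i h1 h2
    have hi : i < n := by simp [pvMapB] at h1; omega
    rw [pvMapB_getElem n f i hi, pvMapB_getElem n f' i hi, h i hi]

def pvSeenL (n : ℕ) (V : Finset ℕ) : List Bool := pvMapB n (fun j => decide (j ∈ V))

lemma pvSeenL_get (n : ℕ) (V : Finset ℕ) (q : ℕ) (hq : q < n) :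
    PySem.List.pyGet? (pvSeenL n V) ((q : ℕ) : Int) = some (decide (q ∈ V)) := by
  rw [PySem.List.pyGet?_natCast, List.getElem?_eq_getElem (by simp [pvSeenL, pvMapB]; omega)]
  simp [pvSeenL, pvMapB, hq]

lemma pvSeenL_set (n : ℕ) (V : Finset ℕ) (q : ℕ) (hq : q < n) :
    PySem.List.pySetD (pvSeenL n V) ((q : ℕ) : Int) true = pvSeenL n (insert q V) := by
  rw [show ((q : ℕ) : Int) = ((q : ℕ) : Int) from rfl]
  rw [PySem.List.pySetD_of_nonneg _ _ (by omega)]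
  rw [show ((q : ℕ) : Int).toNat = q by omega]
  unfold pvSeenL
  rw [pvMapB_set n _ q true hq]
  apply pvMapB_congr
  intro i hi
  by_cases h : i = q
  · simp [h]
  · simp [h]

def pvOptMin (o : Option Int) (w : Int) : Option Int :=
  match o with
  | none => some w
  | some m => if w < m then some w else some m

lemma pvOptMin_some (m w : Int) : pvOptMin (some m) w = some (min m w) := by
  show (if w < m then some w else some m) = some (min m w)
  rcases le_or_gt m w with h | h
  · rw [if_neg (by omega), min_eq_left h]
  · rw [if_pos h, min_eq_right (by omega)]

lemma pvFoldMin_some : ∀ (ws : List Int) (w : Int),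
    ws.foldl pvOptMin (some w) = some (ws.foldl min w) := by
  intro ws
  induction ws with
  | nil => intro w; rfl
  | cons x t ih => intro w; simp only [List.foldl_cons, pvOptMin_some, ih]

lemma pvFoldlMin_le : ∀ (ws : List Int) (w : Int),
    ws.foldl min w ≤ w ∧ ∀ y ∈ ws, ws.foldl min w ≤ y := by
  intro ws
  induction ws with
  | nil => intro w; simp
  | cons x t ih =>
    intro w
    obtain ⟨h1, h2⟩ := ih (min w x)
    refine ⟨le_trans h1 (by omega), ?_⟩
    intro y hy
    rcases List.mem_cons.1 hy with rfl | hyt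
    · exact le_trans h1 (by omega)
    · exact h2 y hyt

lemma pvFoldlMin_mem : ∀ (ws : List Int) (w : Int), ws.foldl min w ∈ w :: ws := by
  intro ws
  induction ws with
  | nil => intro w; simp
  | cons x t ih =>
    intro w
    have := ih (min w x)
    simp only [List.foldl_cons]
    rcases List.mem_cons.1 this with h | h
    · rcases le_total w x with hle | hle
      · rw [h, min_eq_left hle]; simp
      · rw [h, min_eq_right hle]; simp
    · simp [h]

lemma pvB_walk (kp kk wag : List Int) (H : PvH kp kk wag)
    (pos : PySem.Dict Int Int)
    (hpos : ∀ v ∈ kp, pos.get? v = some ((List.idxOf v kp : ℕ) : Int))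
    (V : Finset ℕ) (q0 : ℕ) (hq0 : q0 < wag.length)
    (hdisj : ∀ x ∈ pvOrbit (pvG kp kk) q0, x ∉ V) :
    ∀ (r k : ℕ), k + r = Function.minimalPeriod (pvG kp kk) q0 →
    ∀ (fuel : ℕ) (csum : Int) (cmin : Option Int) (clen : Int),
    metoda1Walk kp kk wag pos (fuel + r + 1)
        (pvSeenL wag.length (V ∪ (pvPath (pvG kp kk) q0 k).toFinset))
        (((pvG kp kk)^[k] q0 : ℕ) : Int) csum cmin clen
      = (pvSeenL wag.length (V ∪ pvOrbit (pvG kp kk) q0),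
         csum + ((List.range r).map (fun i => pvWgt kp wag ((pvG kp kk)^[k+i] q0))).sum,
         ((List.range r).map (fun i => pvWgt kp wag ((pvG kp kk)^[k+i] q0))).foldl pvOptMin cmin,
         clen + (r : Int)) := by
  set n := wag.length with hn
  set g := pvG kp kk with hgdef
  have hlen : kp.length = n := H.lenp
  have hlenk : kk.length = n := H.lenk
  have hg : ∀ j, j < n → g j < n := fun j hj => pvG_lt kp kk wag H j hj
  have hginj : ∀ a b, a < n → b < n → g a = g b → a = b :=
    fun a b ha hb h => pvG_inj kp kk wag H a b ha hb h
  set per := Function.minimalPeriod g q0 with hper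
  have hperpos : 0 < per :=
    Function.minimalPeriod_pos_of_mem_periodicPts (pvPeriodic n g hg hginj q0 hq0)
  have hiter : ∀ k, g^[k] q0 < n := fun k => pvIter_lt n g hg q0 hq0 k
  have hinjIo : ∀ a b, a < per → b < per → g^[a] q0 = g^[b] q0 → a = b := by
    intro a b ha hb h
    exact Function.iterate_injOn_Iio_minimalPeriod (by exact ha) (by exact hb) h
  have horbpath : pvOrbit g q0 = (pvPath g q0 per).toFinset :=
    pvOrbit_eq_path n g hg hginj q0 hq0
  have hiter_orb : ∀ k, g^[k] q0 ∈ pvOrbit g q0 := fun k => pvIter_mem_pvOrbit n g hg hginj q0 hq0 k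
  have hperiter : g^[per] q0 = q0 := Function.iterate_minimalPeriod
  have hpath_elim : ∀ k x, x ∈ (pvPath g q0 k).toFinset → ∃ a, a < k ∧ g^[a] q0 = x := by
    intro k x hx
    simp [pvPath] at hx
    obtain ⟨a, ha, hax⟩ := hx
    exact ⟨a, ha, hax.symm⟩
  intro r
  induction r with
  | zero =>
    intro k hk fuel csum cmin clen
    have hkper : k = per := by omega
    have hq0mem : q0 ∈ V ∪ (pvPath g q0 k).toFinset := by
      apply Finset.mem_union_right
      rw [hkper, ← horbpath]
      exact pvOrbit_self g q0
    have hpos0 : g^[k] q0 = q0 := by rw [hkper]; exact hperiter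
    have hVO : V ∪ (pvPath g q0 k).toFinset = V ∪ pvOrbit g q0 := by
      rw [hkper, ← horbpath]
    simp only [metoda1Walk, hpos0, pvSeenL_get n _ q0 hq0, decide_eq_true_eq]
    rw [if_pos ((Finset.mem_union.1 hq0mem).elim (fun h => by simp [h]) (fun h => by simp [h]))]
    rw [hVO]
    simp
  | succ r ih =>
    intro k hk fuel csum cmin clen
    have hkper : k < per := by omega
    set q := g^[k] q0 with hqdef
    have hqn : q < n := hiter k
    have hqnot : q ∉ V ∪ (pvPath g q0 k).toFinset := by
      intro hc
      rcases Finset.mem_union.1 hc with h | h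
      · exact hdisj q (hiter_orb k) h
      · obtain ⟨a, ha, hax⟩ := hpath_elim k q h
        have := hinjIo a k (by omega) hkper hax
        omega
    have hseen : PySem.List.pyGet? (pvSeenL n (V ∪ (pvPath g q0 k).toFinset)) ((q : ℕ) : Int)
        = some false := by
      rw [pvSeenL_get n _ q hqn]
      simp [hqnot]
    have hsetseen : PySem.List.pySetD (pvSeenL n (V ∪ (pvPath g q0 k).toFinset))
          ((q : ℕ) : Int) true
        = pvSeenL n (V ∪ (pvPath g q0 (k+1)).toFinset) := by
      rw [pvSeenL_set n _ q hqn, pvPath_succ, Finset.union_insert, hqdef]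
    have hgetkp : PySem.List.pyGet? kp ((q : ℕ) : Int) = some (pvE kp q) := by
      rw [PySem.List.pyGet?_natCast, List.getElem?_eq_getElem (by omega),
        pvE_getElem kp q (by omega)]
    have hbe := (H.memp _).1 (pvE_mem kp q (by omega))
    have hgetw : PySem.List.pyGet? wag (pvE kp q - 1) = some (pvWgt kp wag q) := by
      rw [PySem.List.pyGet?_of_nonneg _ (by omega)]
      rw [List.getElem?_eq_getElem (by omega)]
      unfold pvWgt pvWv
      rw [List.getD_eq_getElem wag 0 (by omega)]
    have hgetkk : PySem.List.pyGet? kk ((q : ℕ) : Int) = some (pvE kk q) := by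
      rw [PySem.List.pyGet?_natCast, List.getElem?_eq_getElem (by omega),
        pvE_getElem kk q (by omega)]
    have htqkp : pvE kk q ∈ kp := pvE_kk_mem_kp kp kk wag H q (by omega)
    have hposq : pos.get? (pvE kk q) = some (((g^[k+1] q0 : ℕ) : Int)) := by
      rw [hpos _ htqkp]
      congr 2
      have : g q = g^[k+1] q0 := by
        rw [Function.iterate_succ_apply', ← hqdef]
      rw [← this, hgdef]
      rfl
    have hih := ih (k+1) (by omega) fuel (csum + pvWgt kp wag q)
      (pvOptMin cmin (pvWgt kp wag q)) (clen + 1)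
    rw [show fuel + (r+1) + 1 = (fuel + r + 1) + 1 by omega]
    generalize hF : fuel + r + 1 = F at hih ⊢
    have hshift : ∀ (f : ℕ → Int), ((List.range (r+1)).map (fun i => f (k+i))).sum
        = f k + ((List.range r).map (fun i => f (k+1+i))).sum := by
      intro f
      rw [List.range_succ_eq_map]
      simp only [List.map_cons, List.map_map, List.sum_cons, Function.comp_def,
        Nat.succ_eq_add_one, Nat.add_zero]
      congr 1
      exact congrArg List.sum (List.map_congr_left (fun i _ => by congr 1; omega))
    have hfold : ((List.range (r+1)).map (fun i => pvWgt kp wag (g^[k+i] q0))).foldl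
          pvOptMin cmin
        = ((List.range r).map (fun i => pvWgt kp wag (g^[k+1+i] q0))).foldl pvOptMin
            (pvOptMin cmin (pvWgt kp wag q)) := by
      rw [List.range_succ_eq_map]
      simp only [List.map_cons, List.map_map, List.foldl_cons, Function.comp_def,
        Nat.succ_eq_add_one, Nat.add_zero]
      rw [show g^[k] q0 = q from hqdef.symm]
      have hl : (List.range r).map (fun x => pvWgt kp wag (g^[k+(x+1)] q0))
          = (List.range r).map (fun i => pvWgt kp wag (g^[k+1+i] q0)) :=
        List.map_congr_left (fun i _ => by congr 2; omega)
      rw [hl]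
    rcases cmin with _ | m0 <;>
      (simp only [metoda1Walk, hseen, Bool.false_eq_true, if_false, hsetseen, hgetkp,
        hgetw, hgetkk, hposq]
       simp only [pvOptMin] at hih hfold
       rw [hih]
       simp only [Prod.mk.injEq]
       refine ⟨trivial, ?_, ?_, ?_⟩
       · have hs := hshift (fun j => pvWgt kp wag (g^[j] q0))
         simp only at hs
         rw [hs, show g^[k] q0 = q from hqdef.symm]
         ring
       · rw [hfold]
       · push_cast
         ring)

noncomputable def pvX (g : ℕ → ℕ) (n i : ℕ) : Finset ℕ :=
  (Finset.range n).filter (fun j => ∃ j' ∈ pvOrbit g j, j' < i)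

noncomputable def pvV (g : ℕ → ℕ) (n i : ℕ) : Finset ℕ :=
  (pvX g n i).filter (fun j => ¬ (g j = j))

lemma pvSeenL_getD (n : ℕ) (V : Finset ℕ) (q : ℕ) (hq : q < n) :
    (pvSeenL n V).getD q false = decide (q ∈ V) := by
  rw [List.getD_eq_getElem _ _ (by simp [pvSeenL, pvMapB]; omega)]
  simp [pvSeenL, pvMapB, hq]

lemma pvB_outer (kp kk wag : List Int) (H : PvH kp kk wag)
    (pos : PySem.Dict Int Int)
    (hpos : ∀ v ∈ kp, pos.get? v = some ((List.idxOf v kp : ℕ) : Int)) :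
    ∀ (i : ℕ), i ≤ wag.length →
    (List.range i).foldl
      (fun st i' =>
        let seen := st.1
        let total := st.2
        if seen.getD i' false || (kp.getD i' 0 == kk.getD i' 0) then st
        else
          let r := metoda1Walk kp kk wag pos (kp.length + 1) seen (i' : Int) 0 none 0
          match r.2.2.1 with
          | none => (r.1, total)
          | some cmin => (r.1, total + (r.2.1 + (r.2.2.2 - 2) * cmin)))
      (pvSeenL wag.length ∅, 0)
      = (pvSeenL wag.length (pvV (pvG kp kk) wag.length i),
         pvF (pvG kp kk) (pvWgt kp wag) (pvX (pvG kp kk) wag.length i)) := by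
  set n := wag.length with hn
  set g := pvG kp kk with hgdef
  have hlen : kp.length = n := H.lenp
  have hlenk : kk.length = n := H.lenk
  have hg : ∀ j, j < n → g j < n := fun j hj => pvG_lt kp kk wag H j hj
  have hginj : ∀ a b, a < n → b < n → g a = g b → a = b :=
    fun a b ha hb h => pvG_inj kp kk wag H a b ha hb h
  have hXsub : ∀ i, ∀ j ∈ pvX g n i, j < n := by
    intro i j hj
    have := (Finset.mem_filter.1 hj).1
    simpa using this
  have hXcl : ∀ i, ∀ j ∈ pvX g n i, pvOrbit g j ⊆ pvX g n i := by
    intro i j hj y hy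
    obtain ⟨h1, j', hj', hj'i⟩ := Finset.mem_filter.1 hj |>.imp id (fun h => h)
    have hjn : j < n := by simpa using h1
    have horb := pvOrbit_eq_of_mem n g hg hginj j hjn y hy
    apply Finset.mem_filter.2
    refine ⟨by simpa using pvOrbit_subset n g hg j hjn y hy, ?_⟩
    obtain ⟨j'', hj''⟩ := Finset.mem_filter.1 hj |>.2
    exact ⟨j'', by rw [horb]; exact hj''.1, hj''.2⟩
  have hXsucc : ∀ i, i < n → pvX g n (i+1) = pvX g n i ∪ pvOrbit g i := by
    intro i hi
    ext x
    simp only [pvX, Finset.mem_filter, Finset.mem_union, Finset.mem_range]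
    constructor
    · rintro ⟨hx, j', hj', hj'lt⟩
      rcases Nat.lt_or_ge j' i with h | h
      · exact Or.inl ⟨hx, j', hj', h⟩
      · have hj'i : j' = i := by omega
        subst hj'i
        right
        have hxn : x < n := hx
        have := pvOrbit_eq_of_mem n g hg hginj x hxn j' hj'
        rw [this]
        exact pvOrbit_self g x
    · rintro (⟨hx, j', hj', hlt⟩ | hx)
      · exact ⟨hx, j', hj', by omega⟩
      · have hxn : x < n := by simpa using pvOrbit_subset n g hg i hi x hx
        refine ⟨hxn, i, ?_, by omega⟩
        rw [pvOrbit_eq_of_mem n g hg hginj i hi x hx]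
        exact pvOrbit_self g i
  intro i
  induction i with
  | zero =>
    intro _
    have hX0 : pvX g n 0 = ∅ := by
      ext x; simp [pvX]
    have hV0 : pvV g n 0 = ∅ := by
      rw [pvV, hX0]; rfl
    rw [hX0, hV0, pvF_empty]
    rfl
  | succ i ihi =>
    intro hi1
    have hi : i < n := by omega
    rw [List.range_succ, List.foldl_append, ihi (by omega), List.foldl_cons, List.foldl_nil]
    by_cases hseen : i ∈ pvV g n i
    · -- already processed: skip, nothing changes
      have hcond : (pvSeenL n (pvV g n i)).getD i false = true := by
        rw [pvSeenL_getD n _ i hi]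
        simp [hseen]
      simp only [hcond, Bool.true_or, if_true]
      have hiX : i ∈ pvX g n i := (Finset.mem_filter.1 hseen).1
      have hX1 : pvX g n (i+1) = pvX g n i := by
        rw [hXsucc i hi]
        rw [Finset.union_eq_left]
        exact hXcl i i hiX
      rw [hX1, pvV, pvV, hX1]
    · by_cases hfix : pvE kp i = pvE kk i
      · -- a fixed elephant: skipped, cost 0
        have hgi : g i = i := by
          rw [hgdef]
          unfold pvG
          rw [← hfix]
          exact pvP_pvE kp H.ndp i (by omega)
        have horbi : pvOrbit g i = {i} := pvOrbit_fixed g i hgi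
        have hiX : i ∉ pvX g n i := by
          intro hc
          obtain ⟨j', hj', hj'lt⟩ := (Finset.mem_filter.1 hc).2
          rw [horbi] at hj'
          simp at hj'
          omega
        have hcond : ((pvSeenL n (pvV g n i)).getD i false
            || (kp.getD i 0 == kk.getD i 0)) = true := by
          have : (kp.getD i 0 == kk.getD i 0) = true := by
            rw [beq_iff_eq]
            exact hfix
          rw [this, Bool.or_true]
        simp only [hcond, if_true]
        have hX1 : pvX g n (i+1) = pvX g n i ∪ {i} := by
          rw [hXsucc i hi, horbi]
        have hV1 : pvV g n (i+1) = pvV g n i := by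
          rw [pvV, pvV, hX1]
          ext x
          simp only [Finset.mem_filter, Finset.mem_union, Finset.mem_singleton]
          constructor
          · rintro ⟨h1 | h1, h2⟩
            · exact ⟨h1, h2⟩
            · subst h1; exact absurd hgi h2
          · rintro ⟨h1, h2⟩
            exact ⟨Or.inl h1, h2⟩
        have hF1 : pvF g (pvWgt kp wag) (pvX g n (i+1)) = pvF g (pvWgt kp wag) (pvX g n i) := by
          rw [hX1]
          have herase := pvF_erase n g hg hginj (pvWgt kp wag)
            (pvX g n i ∪ {i}).card (pvX g n i ∪ {i}) le_rfl
            (by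
              intro j hj
              rcases Finset.mem_union.1 hj with h | h
              · exact hXsub i j h
              · simp at h; omega)
            (by
              intro j hj
              rcases Finset.mem_union.1 hj with h | h
              · exact (hXcl i j h).trans Finset.subset_union_left
              · simp at h
                subst h
                rw [horbi]
                intro y hy
                simp at hy
                subst hy
                exact Finset.mem_union_right _ (by simp))
            i (Finset.mem_union_right _ (by simp))
          rw [herase, horbi, pvCost_singleton]
          have : (pvX g n i ∪ {i}) \ {i} = pvX g n i := by
            ext x
            simp only [Finset.mem_sdiff, Finset.mem_union, Finset.mem_singleton]
            constructor
            · rintro ⟨h1 | h1, h2⟩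
              · exact h1
              · exact absurd h1 h2
            · intro hx
              refine ⟨Or.inl hx, ?_⟩
              intro hc
              subst hc
              exact hiX hx
          rw [this]
          ring
        rw [hV1, hF1]
      · -- a genuine cycle: walk it
        have hgi : g i ≠ i := by
          intro hc
          apply hfix
          have h1 : pvE kp (g i) = pvE kk i := by
            rw [hgdef]
            unfold pvG
            exact pvE_pvP kp _ (pvE_kk_mem_kp kp kk wag H i (by omega))
          rw [← h1, hc]
        have hiX : i ∉ pvX g n i := by
          intro hc
          exact hseen (Finset.mem_filter.2 ⟨hc, hgi⟩)
        have hcond : ((pvSeenL n (pvV g n i)).getD i false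
            || (kp.getD i 0 == kk.getD i 0)) = false := by
          rw [pvSeenL_getD n _ i hi]
          have h1 : decide (i ∈ pvV g n i) = false := by simp [hseen]
          have h2 : (kp.getD i 0 == kk.getD i 0) = false := by
            rw [beq_eq_false_iff_ne]
            exact hfix
          rw [h1, h2]
          rfl
        simp only [hcond, Bool.false_eq_true, if_false]
        have hperpos : 0 < Function.minimalPeriod g i :=
          Function.minimalPeriod_pos_of_mem_periodicPts (pvPeriodic n g hg hginj i hi)
        set per := Function.minimalPeriod g i with hper
        have horbp : pvOrbit g i = (pvPath g i per).toFinset :=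
          pvOrbit_eq_path n g hg hginj i hi
        have hnd : (pvPath g i per).Nodup := pvPath_nodup g i per (by rw [hper])
        have hcardorb : (pvOrbit g i).card = per := pvOrbit_card n g hg hginj i hi
        have horbsub : pvOrbit g i ⊆ Finset.range n := by
          intro x hx
          simpa using pvOrbit_subset n g hg i hi x hx
        have hperle : per ≤ n := by
          rw [← hcardorb]
          simpa using Finset.card_le_card horbsub
        have hdisj : ∀ x ∈ pvOrbit g i, x ∉ pvV g n i := by
          intro x hx hxV
          have hxX := (Finset.mem_filter.1 hxV).1
          have heq := pvOrbit_eq_of_mem n g hg hginj i hi x hx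
          exact hiX (hXcl i x hxX (by rw [heq]; exact pvOrbit_self g i))
        have hwalk := pvB_walk kp kk wag H pos hpos (pvV g n i) i hi hdisj per 0
          (by simp only [← hgdef, ← hper]; omega) (n - per) 0 none 0
        have hp0 : (pvPath g i 0).toFinset = ∅ := by simp [pvPath]
        rw [hp0, Finset.union_empty] at hwalk
        simp only [Function.iterate_zero, id_eq] at hwalk
        rw [show kp.length + 1 = n - per + per + 1 by omega]
        rw [hwalk]
        simp only [← hgdef, ← hper]
        -- the min accumulator is `some` of the running minimum of the cycle weights
        have hLcons : (List.range per).map (fun i' => pvWgt kp wag (g^[0+i'] i))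
            = pvWgt kp wag i
              :: (List.range (per-1)).map (fun i' => pvWgt kp wag (g^[i'+1] i)) := by
          rw [show per = (per-1)+1 by omega, List.range_succ_eq_map]
          simp only [List.map_cons, List.map_map, Function.comp_def, Nat.succ_eq_add_one,
            Nat.add_zero, Nat.zero_add, Function.iterate_zero, id_eq]
          rw [show per - 1 + 1 - 1 = per - 1 by omega]
        set ws := (List.range (per-1)).map (fun i' => pvWgt kp wag (g^[i'+1] i)) with hws
        have hfoldsome : ((List.range per).map (fun i' => pvWgt kp wag (g^[0+i'] i))).foldl
              pvOptMin none = some (ws.foldl min (pvWgt kp wag i)) := by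
          rw [hLcons]
          rw [List.foldl_cons]
          rw [show pvOptMin none (pvWgt kp wag i) = some (pvWgt kp wag i) from rfl]
          exact pvFoldMin_some ws (pvWgt kp wag i)
        set minv := ws.foldl min (pvWgt kp wag i) with hminv
        -- minv is the minimum weight on the cycle
        have hminv_min : minv = pvMinW (pvWgt kp wag) (pvOrbit g i) := by
          have hpathw : (pvPath g i per).map (pvWgt kp wag)
              = pvWgt kp wag i :: ws := by
            unfold pvPath
            rw [List.map_map]
            have := hLcons
            simpa [Function.comp_def] using this
          have hne : (pvOrbit g i).Nonempty := ⟨i, pvOrbit_self g i⟩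
          rw [pvMinW, dif_pos hne]
          apply le_antisymm
          · -- minv is a lower bound of the orbit weights
            apply Finset.le_inf'
            intro j hj
            have hj' : pvWgt kp wag j ∈ (pvPath g i per).map (pvWgt kp wag) :=
              List.mem_map_of_mem (List.mem_toFinset.1 (horbp ▸ hj))
            rw [hpathw] at hj'
            obtain ⟨hle1, hle2⟩ := pvFoldlMin_le ws (pvWgt kp wag i)
            rcases List.mem_cons.1 hj' with h | h
            · rw [h]
              exact hle1
            · exact hle2 _ h
          · -- minv is itself one of the orbit weights
            have hmem := pvFoldlMin_mem ws (pvWgt kp wag i)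
            have hmm : minv ∈ (pvPath g i per).map (pvWgt kp wag) := by
              rw [hpathw]
              exact hmem
            obtain ⟨j, hj, hjv⟩ := List.mem_map.1 hmm
            have hjo : j ∈ pvOrbit g i := by
              rw [horbp]
              exact List.mem_toFinset.2 hj
            rw [← hjv]
            exact Finset.inf'_le _ hjo
        -- the sum accumulator is the total weight of the cycle
        have hsum : ((List.range per).map (fun i' => pvWgt kp wag (g^[0+i'] i))).sum
            = ∑ j ∈ pvOrbit g i, pvWgt kp wag j := by
          rw [horbp, List.sum_toFinset _ hnd]
          unfold pvPath
          rw [List.map_map]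
          congr 1
          exact List.map_congr_left (fun a _ => by simp [Function.comp_def])
        -- update the processed sets
        have hX1 : pvX g n (i+1) = pvX g n i ∪ pvOrbit g i := hXsucc i hi
        have hOnf : ∀ j ∈ pvOrbit g i, g j ≠ j := by
          intro j hj hc
          have hjn : j < n := by simpa using horbsub hj
          have h1 := pvOrbit_fixed g j hc
          have h2 := pvOrbit_eq_of_mem n g hg hginj i hi j hj
          rw [h1] at h2
          have : i ∈ ({j} : Finset ℕ) := by rw [h2]; exact pvOrbit_self g i
          simp at this
          subst this
          exact hgi hc
        have hV1 : pvV g n (i+1) = pvV g n i ∪ pvOrbit g i := by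
          rw [pvV, pvV, hX1]
          ext x
          simp only [Finset.mem_filter, Finset.mem_union]
          constructor
          · rintro ⟨h1 | h1, h2⟩
            · exact Or.inl ⟨h1, h2⟩
            · exact Or.inr h1
          · rintro (⟨h1, h2⟩ | h1)
            · exact ⟨Or.inl h1, h2⟩
            · exact ⟨Or.inr h1, hOnf x h1⟩
        have hXdisj : pvX g n i ∩ pvOrbit g i = ∅ := by
          ext x
          simp only [Finset.mem_inter, Finset.notMem_empty, iff_false]
          rintro ⟨hxX, hxO⟩
          have heq := pvOrbit_eq_of_mem n g hg hginj i hi x hxO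
          exact hiX (hXcl i x hxX (by rw [heq]; exact pvOrbit_self g i))
        have hFnew : pvF g (pvWgt kp wag) (pvX g n (i+1))
            = pvF g (pvWgt kp wag) (pvX g n i) + pvCost (pvWgt kp wag) (pvOrbit g i) := by
          rw [hX1]
          have herase := pvF_erase n g hg hginj (pvWgt kp wag)
            (pvX g n i ∪ pvOrbit g i).card (pvX g n i ∪ pvOrbit g i) le_rfl
            (by
              intro j hj
              rcases Finset.mem_union.1 hj with h | h
              · exact hXsub i j h
              · simpa using horbsub h)
            (by
              intro j hj
              rcases Finset.mem_union.1 hj with h | h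
              · exact (hXcl i j h).trans Finset.subset_union_left
              · rw [pvOrbit_eq_of_mem n g hg hginj i hi j h]
                exact Finset.subset_union_right)
            i (Finset.mem_union_right _ (pvOrbit_self g i))
          rw [herase]
          have hsd : (pvX g n i ∪ pvOrbit g i) \ pvOrbit g i = pvX g n i := by
            ext x
            simp only [Finset.mem_sdiff, Finset.mem_union]
            constructor
            · rintro ⟨h1 | h1, h2⟩
              · exact h1
              · exact absurd h1 h2
            · intro hx
              refine ⟨Or.inl hx, ?_⟩
              intro hc
              have : x ∈ pvX g n i ∩ pvOrbit g i := Finset.mem_inter.2 ⟨hx, hc⟩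
              rw [hXdisj] at this
              simp at this
          rw [hsd]
          ring
        simp only [hfoldsome]
        rw [hV1, hFnew]
        simp only [Prod.mk.injEq]
        refine ⟨rfl, ?_⟩
        rw [pvCost, hminv_min, hsum, hcardorb]
        push_cast
        ring

lemma pvB_eq (kp kk wag : List Int) (H : PvH kp kk wag) :
    metoda_1_alt kp kk wag
      = pvF (pvG kp kk) (pvWgt kp wag) (Finset.range wag.length) := by
  unfold metoda_1_alt
  have hpos : ∀ v ∈ kp,
      ((PySem.List.enumerate kp 0).foldl (fun d iv => d.insert iv.2 iv.1)
        (PySem.Dict.empty : PySem.Dict Int Int)).get? v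
        = some ((List.idxOf v kp : ℕ) : Int) := by
    intro v hv
    rw [pvPos_get? v kp 0 _ H.ndp, if_pos hv]
    congr 1
    ring
  have hrepl : List.replicate kp.length false = pvSeenL wag.length ∅ := by
    apply List.ext_getElem
    · simp [pvSeenL, pvMapB, H.lenp]
    · intro j h1 h2
      simp [pvSeenL, pvMapB]
  have houter := pvB_outer kp kk wag H _ hpos wag.length le_rfl
  have hXn : pvX (pvG kp kk) wag.length wag.length = Finset.range wag.length := by
    ext j
    simp only [pvX, Finset.mem_filter, Finset.mem_range]
    constructor
    · rintro ⟨h, _⟩; exact h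
    · intro h
      refine ⟨h, j, pvOrbit_self _ j, h⟩
  dsimp only at houter ⊢
  rw [hrepl, show List.range kp.length = List.range wag.length by rw [H.lenp]]
  rw [houter, hXn]

lemma pvA_trivial (kp wag : List Int) : metoda_1 kp kp wag = 0 := by
  unfold metoda_1
  exact pvLoop_done kp wag 0 _

lemma pvB_trivial (kp wag : List Int) : metoda_1_alt kp kp wag = 0 := by
  unfold metoda_1_alt
  have haux : ∀ (l : List ℕ) (st : List Bool × Int),
      l.foldl
        (fun st i =>
          let seen := st.1
          let total := st.2
          if seen.getD i false || (kp.getD i 0 == kp.getD i 0) then st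
          else
            let r := metoda1Walk kp kp wag
              ((PySem.List.enumerate kp 0).foldl (fun d iv => d.insert iv.2 iv.1)
                PySem.Dict.empty) (kp.length + 1) seen (i : Int) 0 none 0
            match r.2.2.1 with
            | none => (r.1, total)
            | some cmin => (r.1, total + (r.2.1 + (r.2.2.2 - 2) * cmin))) st = st := by
    intro l
    induction l with
    | nil => intro st; rfl
    | cons x t ih =>
      intro st
      rw [List.foldl_cons]
      have hc : (st.1.getD x false || (kp.getD x 0 == kp.getD x 0)) = true := by
        simp
      simp only [hc, if_true]
      exact ih st
  dsimp only at haux ⊢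
  rw [haux]

-- ===== VERDICT (by name: the statement is the Claim_ definition above) =====
theorem metoda_1_spec : Claim_equal_metoda_1 := by
  intro kp kk wag _ hpre
  unfold Spec_metoda_1
  rcases hpre with heq | ⟨hp, hk, hw⟩
  · subst heq
    rw [pvA_trivial, pvB_trivial]
  · have H := pvH_of_perm kp kk wag hp hk hw
    rw [pvA_eq kp kk wag H, pvB_eq kp kk wag H]
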